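-- pv_equiv track=rewrite | github.com/CodeLab4/lab4_algorithm_python | programmers/lv2/250136_roy.py | solution
-- ===== SOURCE A (Python) =====
-- from collections import deque
--
-- def solution(land):
--     answer = 0
--     n, m = len(land), len(land[0])
--     visited = [[False] * m for _ in range(n)]
--     oil = [0] * m
--     directions = [(0, 1), (1, 0), (-1, 0), (0, -1)]
--
--     def bfs(row, col):
--         queue = deque()
--         queue.append([row, col])
--         visited[row][col] = True
--         cnt = 1
--         oil_covered = {col}
--
--         while queue:
--             pr, pc = queue.popleft()
--             for dr, dc in directions:
--                 nr, nc = pr + dr, pc + dc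
--                 if 0 <= nr < n and 0 <= nc < m and land[nr][nc] == 1 and not visited[nr][nc]:
--                     queue.append([nr, nc])
--                     visited[nr][nc] = True
--                     cnt += 1
--                     oil_covered.add(nc)
--
--         for c in oil_covered:
--             oil[c] += cnt
--
--     for i in range(n):
--         for j in range(m):
--             if land[i][j] == 1 and not visited[i][j]:
--                 bfs(i, j)
--
--     answer = max(oil)
--
--     return answer
-- ===== SOURCE B (Python) =====
-- def solution(land):
--     n, m = len(land), len(land[0])
--     comp = {}           # cell -> component id
--     size = {}           # component id -> cell count
--     cid = 0
--     for i in range(n):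
--         for j in range(m):
--             if land[i][j] == 1 and (i, j) not in comp:
--                 comp[(i, j)] = cid
--                 stack = [(i, j)]
--                 sz = 0
--                 while stack:
--                     r, c = stack.pop()
--                     sz += 1
--                     for nr, nc in ((r - 1, c), (r + 1, c), (r, c - 1), (r, c + 1)):
--                         if 0 <= nr < n and 0 <= nc < m and land[nr][nc] == 1 and (nr, nc) not in comp:
--                             comp[(nr, nc)] = cid
--                             stack.append((nr, nc))
--                 size[cid] = sz
--                 cid += 1
--     best = 0
--     for c in range(m):
--         ids = {comp[(r, c)] for r in range(n) if land[r][c] == 1}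
--         best = max(best, sum(size[k] for k in ids))
--     return best
-- ===== Notes on version B (the rewrite author's own statement) =====
-- stated objective: alternative
-- what changed: Replaces the BFS-queue flood fill over a visited matrix with per-component updates of a per-column oil array by a stack-based flood fill that labels each cell with a component id and records component sizes in dicts, then aggregates per column (set of distinct component ids in the column, sum of their sizes) and takes a running maximum.
import Mathlib
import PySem

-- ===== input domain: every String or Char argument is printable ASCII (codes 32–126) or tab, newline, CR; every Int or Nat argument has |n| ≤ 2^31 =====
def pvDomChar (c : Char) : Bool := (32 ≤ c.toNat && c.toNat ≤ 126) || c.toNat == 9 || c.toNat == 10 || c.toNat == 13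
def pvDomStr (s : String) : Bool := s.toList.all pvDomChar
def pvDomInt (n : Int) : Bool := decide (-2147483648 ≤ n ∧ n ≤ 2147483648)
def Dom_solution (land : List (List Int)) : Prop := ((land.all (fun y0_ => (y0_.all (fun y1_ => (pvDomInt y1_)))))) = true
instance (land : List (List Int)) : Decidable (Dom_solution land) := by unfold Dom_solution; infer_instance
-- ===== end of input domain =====

-- B replaces A's BFS-queue flood fill and per-component oil updates by a stack-based
-- component labelling (cell -> component id, id -> size) with a per-column aggregation
-- at the end (objective: alternative; same asymptotic cost).

-- ===== PORT A =====
-- land[r][c]; the default is never used on guarded in-range accesses under Pre_ (exact there)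
def pvCell (land : List (List Int)) (r c : Int) : Int :=
  PySem.List.pyGetD (PySem.List.pyGetD land r []) c 0

-- visited[r][c] lookup / visited[r][c] = True; A only accesses in-range indices (exact there)
def pvVGet (v : List (List Bool)) (r c : Int) : Bool :=
  PySem.List.pyGetD (PySem.List.pyGetD v r []) c false

def pvVSet (v : List (List Bool)) (r c : Int) : List (List Bool) :=
  PySem.List.pySetD v r (PySem.List.pySetD (PySem.List.pyGetD v r []) c true)

def pvDirs : List (Int × Int) := [(0, 1), (1, 0), (-1, 0), (0, -1)]

-- the 'for dr, dc in directions' body of A's bfs while-loop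
def pvBfsStep (land : List (List Int)) (n m pr pc : Int)
    (st : List (List Bool) × List (Int × Int) × Int × PySem.Set Int) :
    List (List Bool) × List (Int × Int) × Int × PySem.Set Int :=
  pvDirs.foldl (fun st d =>
    let nr := pr + d.1
    let nc := pc + d.2
    if 0 ≤ nr ∧ nr < n ∧ 0 ≤ nc ∧ nc < m ∧ pvCell land nr nc = 1 ∧ pvVGet st.1 nr nc = false then
      (pvVSet st.1 nr nc, st.2.1 ++ [(nr, nc)], st.2.2.1 + 1, PySem.Set.add st.2.2.2 nc)
    else st) st

-- A's 'while queue' loop (fuel makes it total; n*m+1 steps always suffice under Pre_)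
def pvBfsLoop (land : List (List Int)) (n m : Int) :
    Nat → List (List Bool) → List (Int × Int) → Int → PySem.Set Int →
    List (List Bool) × Int × PySem.Set Int
  | 0, v, _, cnt, cov => (v, cnt, cov)
  | _ + 1, v, [], cnt, cov => (v, cnt, cov)
  | fuel + 1, v, (pr, pc) :: rest, cnt, cov =>
      let st := pvBfsStep land n m pr pc (v, rest, cnt, cov)
      pvBfsLoop land n m fuel st.1 st.2.1 st.2.2.1 st.2.2.2

-- A's bfs(row, col): returns the updated visited array and oil array
def pvBfs (land : List (List Int)) (n m : Int) (v : List (List Bool)) (oil : List Int)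
    (row col : Int) : List (List Bool) × List Int :=
  let r := pvBfsLoop land n m (n.toNat * m.toNat + 1) (pvVSet v row col) [(row, col)] 1
             (PySem.Set.add PySem.Set.empty col)
  (r.1, r.2.2.foldl (fun oil c =>
        PySem.List.pySetD oil c (PySem.List.pyGetD oil c 0 + r.2.1)) oil)

def solution (land : List (List Int)) : Int :=
  let n : Int := land.length
  let m : Int := (PySem.List.pyGetD land 0 []).length
  let init : List (List Bool) × List Int :=
    (List.replicate n.toNat (List.replicate m.toNat false), List.replicate m.toNat (0 : Int))
  let st := (PySem.List.pyRange 0 n 1).foldl (fun st i =>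
      (PySem.List.pyRange 0 m 1).foldl (fun (st : List (List Bool) × List Int) j =>
        if pvCell land i j = 1 ∧ pvVGet st.1 i j = false then pvBfs land n m st.1 st.2 i j
        else st) st) init
  -- max(oil); oil is nonempty under Pre_ (none = ValueError, excluded by Pre_)
  (PySem.List.max? st.2 (fun x => x)).getD 0

-- ===== PORT B =====
def pvNbrs (r c : Int) : List (Int × Int) := [(r - 1, c), (r + 1, c), (r, c - 1), (r, c + 1)]

-- the 'for nr, nc in (...)' body of B's while-loop
def pvDfsStep (land : List (List Int)) (n m cid r c : Int)
    (st : PySem.Dict (Int × Int) Int × List (Int × Int)) :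
    PySem.Dict (Int × Int) Int × List (Int × Int) :=
  (pvNbrs r c).foldl (fun st q =>
    if 0 ≤ q.1 ∧ q.1 < n ∧ 0 ≤ q.2 ∧ q.2 < m ∧ pvCell land q.1 q.2 = 1 ∧
        st.1.contains q = false then
      (st.1.insert q cid, st.2 ++ [q])
    else st) st

-- B's 'while stack' loop; stack.pop() takes the last element (fuel makes it total)
def pvDfsLoop (land : List (List Int)) (n m cid : Int) :
    Nat → PySem.Dict (Int × Int) Int → List (Int × Int) → Int →
    PySem.Dict (Int × Int) Int × Int
  | 0, comp, _, sz => (comp, sz)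
  | fuel + 1, comp, stack, sz =>
      match stack.getLast? with
      | none => (comp, sz)
      | some p =>
          let st := pvDfsStep land n m cid p.1 p.2 (comp, stack.dropLast)
          pvDfsLoop land n m cid fuel st.1 st.2 (sz + 1)

def solution_alt (land : List (List Int)) : Int :=
  let n : Int := land.length
  let m : Int := (PySem.List.pyGetD land 0 []).length
  let st := (PySem.List.pyRange 0 n 1).foldl (fun st i =>
      (PySem.List.pyRange 0 m 1).foldl
        (fun (st : PySem.Dict (Int × Int) Int × PySem.Dict Int Int × Int) j =>
          if pvCell land i j = 1 ∧ st.1.contains (i, j) = false then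
            let r := pvDfsLoop land n m st.2.2 (n.toNat * m.toNat + 1)
                       (st.1.insert (i, j) st.2.2) [(i, j)] 0
            (r.1, st.2.1.insert st.2.2 r.2, st.2.2 + 1)
          else st) st)
      (PySem.Dict.empty, PySem.Dict.empty, 0)
  -- comp[(r,c)] / size[k]: always present under Pre_ (defaults never used there)
  (PySem.List.pyRange 0 m 1).foldl (fun best c =>
    let ids : PySem.Set Int := (PySem.List.pyRange 0 n 1).foldl (fun ids r =>
      if pvCell land r c = 1 then PySem.Set.add ids (st.1.getD (r, c) 0) else ids)
      PySem.Set.empty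
    max best (ids.foldl (fun s k => s + st.2.1.getD k 0) 0)) 0

-- ===== PRECONDITION & SPEC =====
-- Pre_ excludes exactly the inputs where A raises: empty land (IndexError), an empty first
-- row (max([]) is a ValueError), and a row shorter than the first (IndexError).
def Pre_solution (land : List (List Int)) : Prop :=
  land ≠ [] ∧ land.headI ≠ [] ∧ ∀ row ∈ land, land.headI.length ≤ row.length
instance (land : List (List Int)) : Decidable (Pre_solution land) := by
  unfold Pre_solution; infer_instance

def pvWitness_solution : List (List Int) := [[1, 0], [1, 1]]

def Spec_solution (land : List (List Int)) (out : Int) : Prop := out = solution_alt land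
instance (land : List (List Int)) (out : Int) : Decidable (Spec_solution land out) := by
  unfold Spec_solution; infer_instance

-- ===== CLAIM (what is proved, stated in full; the proofs are below) =====
def Claim_equal_solution : Prop :=
  ∀ (land : List (List Int)), Dom_solution land → Pre_solution land →
    Spec_solution land (solution land)


-- ===== LEMMAS AND PROOFS =====
-- ===== basic geometry =====
def pvInGrid (N M : Int) (p : Int × Int) : Prop :=
  0 ≤ p.1 ∧ p.1 < N ∧ 0 ≤ p.2 ∧ p.2 < M

theorem pvInGrid_mk {N M r c : Int} :
    pvInGrid N M (r, c) ↔ (0 ≤ r ∧ r < N ∧ 0 ≤ c ∧ c < M) := Iff.rfl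

def pvGd (land : List (List Int)) (N M : Int) (p : Int × Int) : Prop :=
  pvInGrid N M p ∧ pvCell land p.1 p.2 = 1

def pvAdj (p q : Int × Int) : Prop :=
  (q.1 = p.1 ∧ (q.2 = p.2 + 1 ∨ q.2 = p.2 - 1)) ∨
  (q.2 = p.2 ∧ (q.1 = p.1 + 1 ∨ q.1 = p.1 - 1))

inductive pvReach (land : List (List Int)) (N M : Int) (s : Int × Int) : (Int × Int) → Prop
  | refl : pvReach land N M s s
  | step {p q : Int × Int} : pvReach land N M s p → pvAdj p q → pvGd land N M q →
      pvReach land N M s q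

theorem pvAdj_symm {p q : Int × Int} (h : pvAdj p q) : pvAdj q p := by
  unfold pvAdj at *; omega

theorem pvReach_good {land : List (List Int)} {N M : Int} {s p : Int × Int}
    (hs : pvGd land N M s) (h : pvReach land N M s p) : pvGd land N M p := by
  induction h with
  | refl => exact hs
  | step _ _ hg _ => exact hg

theorem pvReach_closed {land : List (List Int)} {N M : Int} {V0 : Int × Int → Prop}
    (hcl : ∀ p q, V0 p → pvAdj p q → pvGd land N M q → V0 q)
    {s p : Int × Int} (hs : pvGd land N M s) (h : pvReach land N M s p) (hp : V0 p) : V0 s := by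
  induction h with
  | refl => exact hp
  | @step a b hr hadj hg ih =>
      exact ih (hcl b a hp (pvAdj_symm hadj) (pvReach_good hs hr))

-- adjacency from the direction lists
theorem pvAdj_of_dir {p : Int × Int} {d : Int × Int} (hd : d ∈ pvDirs) :
    pvAdj p (p.1 + d.1, p.2 + d.2) := by
  simp only [pvDirs, List.mem_cons, List.not_mem_nil, or_false] at hd
  rcases hd with h | h | h | h <;> subst h <;> unfold pvAdj <;> simp <;> omega

theorem pvAdj_exists_dir {p r : Int × Int} (h : pvAdj p r) :
    ∃ d ∈ pvDirs, r = (p.1 + d.1, p.2 + d.2) := by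
  obtain ⟨r1, r2⟩ := r
  rcases h with ⟨h1, h2 | h2⟩ | ⟨h1, h2 | h2⟩
  · exact ⟨(0,1), by simp [pvDirs], by simp; omega⟩
  · exact ⟨(0,-1), by simp [pvDirs], by simp; omega⟩
  · exact ⟨(1,0), by simp [pvDirs], by simp; omega⟩
  · exact ⟨(-1,0), by simp [pvDirs], by simp; omega⟩

theorem pvAdj_exists_nbr {p r : Int × Int} (h : pvAdj p r) : r ∈ pvNbrs p.1 p.2 := by
  obtain ⟨r1, r2⟩ := r
  unfold pvNbrs
  rcases h with ⟨h1, h2 | h2⟩ | ⟨h1, h2 | h2⟩ <;> simp <;> omega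

theorem pvAdj_of_nbr {p : Int × Int} {r : Int × Int} (h : r ∈ pvNbrs p.1 p.2) : pvAdj p r := by
  unfold pvNbrs at h; unfold pvAdj
  simp only [List.mem_cons, List.not_mem_nil, or_false] at h
  rcases h with h | h | h | h <;> subst h <;> simp

-- ===== visited array lemmas =====
def pvDims (N M : Int) (v : List (List Bool)) : Prop :=
  (v.length : Int) = N ∧ ∀ row ∈ v, (row.length : Int) = M

theorem pvGetD_set {α : Type} (l : List α) (i j : Nat) (a : α) (d : α) :
    (l.set i a).getD j d = if j = i ∧ i < l.length then a else l.getD j d := by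
  rw [List.getD_eq_getElem?_getD, List.getD_eq_getElem?_getD, List.getElem?_set]
  by_cases h : i = j
  · subst h
    by_cases h2 : i < l.length <;> simp [h2]
  · simp [h, Ne.symm h]

theorem pvVGet_getD {v : List (List Bool)} {r c : Int} (hr : 0 ≤ r) (hc : 0 ≤ c) :
    pvVGet v r c = (v.getD r.toNat []).getD c.toNat false := by
  obtain ⟨k, rfl⟩ : ∃ k : Nat, r = (k : Int) := ⟨r.toNat, by omega⟩
  obtain ⟨l, rfl⟩ : ∃ l : Nat, c = (l : Int) := ⟨c.toNat, by omega⟩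
  unfold pvVGet
  simp

theorem pvVSet_getD {v : List (List Bool)} {r c : Int} (hr : 0 ≤ r) (hc : 0 ≤ c) :
    pvVSet v r c = v.set r.toNat ((v.getD r.toNat []).set c.toNat true) := by
  obtain ⟨k, rfl⟩ : ∃ k : Nat, r = (k : Int) := ⟨r.toNat, by omega⟩
  obtain ⟨l, rfl⟩ : ∃ l : Nat, c = (l : Int) := ⟨c.toNat, by omega⟩
  unfold pvVSet
  simp

theorem pvDims_vset {N M : Int} {v : List (List Bool)} (hd : pvDims N M v) {r c : Int}
    (hg : pvInGrid N M (r, c)) : pvDims N M (pvVSet v r c) := by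
  obtain ⟨hg1, hg2, hg3, hg4⟩ := pvInGrid_mk.mp hg
  rw [pvVSet_getD hg1 hg3]
  refine ⟨by simpa using hd.1, ?_⟩
  intro row hrow
  rcases List.mem_or_eq_of_mem_set hrow with h | h
  · exact hd.2 _ h
  · subst h
    rw [List.length_set]
    have hrn : r.toNat < v.length := by have := hd.1; simp at hg2 ⊢; omega
    rw [List.getD_eq_getElem _ _ hrn]
    exact hd.2 _ (List.getElem_mem hrn)

theorem pvVGet_vset {N M : Int} {v : List (List Bool)} (hd : pvDims N M v) {r c r' c' : Int}
    (hg : pvInGrid N M (r, c)) (hr' : 0 ≤ r') (hc' : 0 ≤ c') :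
    pvVGet (pvVSet v r c) r' c' = if r' = r ∧ c' = c then true else pvVGet v r' c' := by
  obtain ⟨hg1, hg2, hg3, hg4⟩ := pvInGrid_mk.mp hg
  have hrn : r.toNat < v.length := by have := hd.1; omega
  have hrowlen : ((v.getD r.toNat []).length : Int) = M := by
    rw [List.getD_eq_getElem _ _ hrn]; exact hd.2 _ (List.getElem_mem hrn)
  rw [pvVSet_getD hg1 hg3, pvVGet_getD hr' hc', pvVGet_getD hr' hc', pvGetD_set]
  by_cases hr : r' = r
  · subst hr
    rw [if_pos ⟨by omega, hrn⟩, pvGetD_set]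
    by_cases hc : c' = c
    · subst hc
      rw [if_pos ⟨by omega, by omega⟩, if_pos ⟨rfl, rfl⟩]
    · rw [if_neg (by omega), if_neg (by simp [hc])]
  · rw [if_neg (by omega), if_neg (by simp [hr])]

theorem pvVGet_vset_mono {N M : Int} {v : List (List Bool)} (hd : pvDims N M v) {r c r' c' : Int}
    (hg : pvInGrid N M (r, c)) (hr' : 0 ≤ r') (hc' : 0 ≤ c')
    (h : pvVGet v r' c' = true) : pvVGet (pvVSet v r c) r' c' = true := by
  rw [pvVGet_vset hd hg hr' hc']
  split_ifs <;> simp [h]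

-- ===== unvisited-cell counting (fuel budget) =====
noncomputable def pvGridF (N M : Int) : Finset (Int × Int) := Finset.Ico 0 N ×ˢ Finset.Ico 0 M

theorem pvMem_gridF {N M : Int} {p : Int × Int} : p ∈ pvGridF N M ↔ pvInGrid N M p := by
  simp only [pvGridF, Finset.mem_product, Finset.mem_Ico, pvInGrid]
  tauto

theorem pvCard_gridF {N M : Int} : (pvGridF N M).card = N.toNat * M.toNat := by
  simp [pvGridF, Finset.card_product, Int.card_Ico]

noncomputable def pvUV (N M : Int) (v : List (List Bool)) : Nat :=
  ((pvGridF N M).filter (fun p => pvVGet v p.1 p.2 = false)).card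

theorem pvUV_le {N M : Int} (v : List (List Bool)) : pvUV N M v ≤ N.toNat * M.toNat := by
  rw [← pvCard_gridF (N := N) (M := M)]
  exact Finset.card_filter_le _ _

theorem pvUV_vset {N M : Int} {v : List (List Bool)} (hd : pvDims N M v) {r c : Int}
    (hg : pvInGrid N M (r, c)) (hv : pvVGet v r c = false) :
    pvUV N M (pvVSet v r c) + 1 = pvUV N M v := by
  have hmem : (r, c) ∈ (pvGridF N M).filter (fun p => pvVGet v p.1 p.2 = false) := by
    simp only [Finset.mem_filter, pvMem_gridF]
    exact ⟨hg, hv⟩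
  have hset : (pvGridF N M).filter (fun p => pvVGet (pvVSet v r c) p.1 p.2 = false) =
      ((pvGridF N M).filter (fun p => pvVGet v p.1 p.2 = false)).erase (r, c) := by
    ext q
    simp only [Finset.mem_filter, Finset.mem_erase, pvMem_gridF]
    constructor
    · rintro ⟨hq, hval⟩
      rw [pvVGet_vset hd hg hq.1 hq.2.2.1] at hval
      constructor
      · rintro rfl; simp at hval
      · refine ⟨hq, ?_⟩
        by_cases he : q.1 = r ∧ q.2 = c
        · exfalso; rw [if_pos he] at hval; exact Bool.true_eq_false.mp hval
        · rwa [if_neg he] at hval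
    · rintro ⟨hne, hq, hval⟩
      refine ⟨hq, ?_⟩
      rw [pvVGet_vset hd hg hq.1 hq.2.2.1, if_neg ?_]
      · exact hval
      · rintro ⟨h1, h2⟩
        exact hne (by cases q; simp_all)
  unfold pvUV
  rw [hset, Finset.card_erase_of_mem hmem]
  have : 0 < ((pvGridF N M).filter (fun p => pvVGet v p.1 p.2 = false)).card :=
    Finset.card_pos.mpr ⟨_, hmem⟩
  omega


-- ===== A-side loop invariant =====
theorem pvGuardA_iff {land : List (List Int)} {N M nr nc : Int} {b : Bool} :
    (0 ≤ nr ∧ nr < N ∧ 0 ≤ nc ∧ nc < M ∧ pvCell land nr nc = 1 ∧ b = false) ↔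
      (pvGd land N M (nr, nc) ∧ b = false) := by
  unfold pvGd pvInGrid; tauto

structure pvMidA (land : List (List Int)) (N M : Int) (V0 : Int × Int → Prop) (s : Int × Int)
    (pp : Int × Int) (F : Finset (Int × Int))
    (st : List (List Bool) × List (Int × Int) × Int × PySem.Set Int) : Prop where
  dims : pvDims N M st.1
  mem : ∀ p : Int × Int, pvInGrid N M p → (pvVGet st.1 p.1 p.2 = true ↔ V0 p ∨ p ∈ F)
  newF : ∀ p ∈ F, pvGd land N M p ∧ pvReach land N M s p ∧ ¬ V0 p
  start : s ∈ F
  pmem : pp ∈ F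
  qmem : ∀ p ∈ st.2.1, p ∈ F
  qnodup : st.2.1.Nodup
  pnotq : pp ∉ st.2.1
  frontier : ∀ p ∈ F, p ≠ pp → p ∉ st.2.1 → ∀ r : Int × Int, pvAdj p r → pvGd land N M r →
      pvVGet st.1 r.1 r.2 = true
  cnt_eq : st.2.2.1 = (F.card : Int)
  cov_mem : ∀ c : Int, c ∈ st.2.2.2 ↔ ∃ r : Int, (r, c) ∈ F
  cov_nodup : st.2.2.2.Nodup

structure pvInvA (land : List (List Int)) (N M : Int) (V0 : Int × Int → Prop) (s : Int × Int)
    (F : Finset (Int × Int))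
    (st : List (List Bool) × List (Int × Int) × Int × PySem.Set Int) : Prop where
  dims : pvDims N M st.1
  mem : ∀ p : Int × Int, pvInGrid N M p → (pvVGet st.1 p.1 p.2 = true ↔ V0 p ∨ p ∈ F)
  newF : ∀ p ∈ F, pvGd land N M p ∧ pvReach land N M s p ∧ ¬ V0 p
  start : s ∈ F
  qmem : ∀ p ∈ st.2.1, p ∈ F
  qnodup : st.2.1.Nodup
  frontier : ∀ p ∈ F, p ∉ st.2.1 → ∀ r : Int × Int, pvAdj p r → pvGd land N M r →
      pvVGet st.1 r.1 r.2 = true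
  cnt_eq : st.2.2.1 = (F.card : Int)
  cov_mem : ∀ c : Int, c ∈ st.2.2.2 ↔ ∃ r : Int, (r, c) ∈ F
  cov_nodup : st.2.2.2.Nodup

def pvStepA (land : List (List Int)) (N M pr pc : Int)
    (st : List (List Bool) × List (Int × Int) × Int × PySem.Set Int) (d : Int × Int) :
    List (List Bool) × List (Int × Int) × Int × PySem.Set Int :=
  let nr := pr + d.1
  let nc := pc + d.2
  if 0 ≤ nr ∧ nr < N ∧ 0 ≤ nc ∧ nc < M ∧ pvCell land nr nc = 1 ∧ pvVGet st.1 nr nc = false then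
    (pvVSet st.1 nr nc, st.2.1 ++ [(nr, nc)], st.2.2.1 + 1, PySem.Set.add st.2.2.2 nc)
  else st

theorem pvBfsStep_eq {land : List (List Int)} {N M pr pc : Int} {st} :
    pvBfsStep land N M pr pc st = pvDirs.foldl (pvStepA land N M pr pc) st := rfl

theorem pvSetAddNodup {cov : PySem.Set Int} (h : cov.Nodup) (x : Int) :
    (PySem.Set.add cov x).Nodup := by
  unfold PySem.Set.add
  split_ifs with hc
  · exact h
  · refine h.append (List.nodup_singleton _) ?_
    intro a ha hb
    simp only [List.mem_singleton] at hb
    subst hb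
    rw [← PySem.Set.contains_iff] at ha
    exact hc ha

theorem pvStepA_spec {land : List (List Int)} {N M : Int} {V0 : Int × Int → Prop}
    {s pp : Int × Int} {F : Finset (Int × Int)} {st} {d : Int × Int}
    (hadj : pvAdj pp (pp.1 + d.1, pp.2 + d.2))
    (h : pvMidA land N M V0 s pp F st) :
    ∃ F' : Finset (Int × Int), F ⊆ F' ∧
      pvMidA land N M V0 s pp F' (pvStepA land N M pp.1 pp.2 st d) ∧
      (pvStepA land N M pp.1 pp.2 st d).2.1.length + pvUV N M (pvStepA land N M pp.1 pp.2 st d).1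
        = st.2.1.length + pvUV N M st.1 ∧
      (∀ r : Int × Int, pvInGrid N M r → pvVGet st.1 r.1 r.2 = true →
        pvVGet (pvStepA land N M pp.1 pp.2 st d).1 r.1 r.2 = true) ∧
      (pvGd land N M (pp.1 + d.1, pp.2 + d.2) →
        pvVGet (pvStepA land N M pp.1 pp.2 st d).1 (pp.1 + d.1) (pp.2 + d.2) = true) := by
  obtain ⟨v, q, cnt, cov⟩ := st
  set nr := pp.1 + d.1 with hnr
  set nc := pp.2 + d.2 with hnc
  by_cases hG : 0 ≤ nr ∧ nr < N ∧ 0 ≤ nc ∧ nc < M ∧ pvCell land nr nc = 1 ∧ pvVGet v nr nc = false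
  · -- the neighbour is a fresh good cell: mark it, push it
    have hGd : pvGd land N M (nr, nc) := (pvGuardA_iff.mp hG).1
    have hfresh : pvVGet v nr nc = false := hG.2.2.2.2.2
    have hgrid : pvInGrid N M (nr, nc) := hGd.1
    have hstep : pvStepA land N M pp.1 pp.2 (v, q, cnt, cov) d =
        (pvVSet v nr nc, q ++ [(nr, nc)], cnt + 1, PySem.Set.add cov nc) := by
      simp only [pvStepA]
      rw [if_pos hG]
    rw [hstep]
    dsimp only
    have hnotF : (nr, nc) ∉ F := by
      intro hmemF
      have := (h.mem (nr, nc) hgrid).mpr (Or.inr hmemF)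
      rw [hfresh] at this; exact Bool.false_ne_true this
    have hnotV0 : ¬ V0 (nr, nc) := by
      intro hv0
      have := (h.mem (nr, nc) hgrid).mpr (Or.inl hv0)
      rw [hfresh] at this; exact Bool.false_ne_true this
    refine ⟨insert (nr, nc) F, Finset.subset_insert _ _, ?_, ?_, ?_, ?_⟩
    · constructor
      · exact pvDims_vset h.dims hgrid
      · intro p hp
        rw [pvVGet_vset h.dims hgrid hp.1 hp.2.2.1]
        by_cases hpe : p = (nr, nc)
        · subst hpe
          rw [if_pos ⟨rfl, rfl⟩]
          constructor
          · intro _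
            exact Or.inr (Finset.mem_insert_self _ _)
          · intro _
            rfl
        · rw [if_neg (fun hcon => hpe (Prod.ext_iff.mpr ⟨hcon.1, hcon.2⟩)), h.mem p hp]
          simp [Finset.mem_insert, hpe]
      · intro p hp
        rcases Finset.mem_insert.mp hp with he | hf
        · subst he
          exact ⟨hGd, pvReach.step (h.newF pp h.pmem).2.1 hadj hGd, hnotV0⟩
        · exact h.newF p hf
      · exact Finset.mem_insert_of_mem h.start
      · exact Finset.mem_insert_of_mem h.pmem
      · intro p hp
        rcases List.mem_append.mp hp with hq | hx
        · exact Finset.mem_insert_of_mem (h.qmem p hq)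
        · simp only [List.mem_singleton] at hx
          subst hx
          exact Finset.mem_insert_self _ _
      · have hxq : (nr, nc) ∉ q := by
          intro hxq
          have hvis := (h.mem _ hgrid).mpr (Or.inr (h.qmem _ hxq))
          rw [hfresh] at hvis; exact Bool.false_ne_true hvis
        refine h.qnodup.append (List.nodup_singleton _) ?_
        intro a ha hb
        simp only [List.mem_singleton] at hb
        subst hb
        exact hxq ha
      · intro hp
        rcases List.mem_append.mp hp with hq | hx
        · exact h.pnotq hq
        · simp only [List.mem_singleton] at hx
          have hvis := (h.mem pp (h.newF pp h.pmem).1.1).mpr (Or.inr h.pmem)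
          rw [hx] at hvis
          dsimp only at hvis
          rw [hfresh] at hvis
          exact Bool.false_ne_true hvis
      · intro p hpF hpne hpq r hr hgr
        have hpF' : p ∈ F := by
          rcases Finset.mem_insert.mp hpF with he | hf
          · exact absurd (he ▸ (List.mem_append.mpr (Or.inr (List.mem_singleton.mpr rfl)))) hpq
          · exact hf
        have hpq' : p ∉ q := fun hc => hpq (List.mem_append.mpr (Or.inl hc))
        have := h.frontier p hpF' hpne hpq' r hr hgr
        exact pvVGet_vset_mono h.dims hgrid hgr.1.1 hgr.1.2.2.1 this
      · have hce : cnt = (F.card : Int) := h.cnt_eq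
        rw [Finset.card_insert_of_notMem hnotF]
        push_cast
        omega
      · intro c
        rw [PySem.Set.mem_add]
        constructor
        · rintro (hc | rfl)
          · obtain ⟨r, hr⟩ := (h.cov_mem c).mp hc
            exact ⟨r, Finset.mem_insert_of_mem hr⟩
          · exact ⟨nr, Finset.mem_insert_self _ _⟩
        · rintro ⟨r, hr⟩
          rcases Finset.mem_insert.mp hr with he | hf
          · right
            exact (Prod.ext_iff.mp he).2
          · left
            exact (h.cov_mem c).mpr ⟨r, hf⟩
      · exact pvSetAddNodup h.cov_nodup nc
    · show (q ++ [(nr, nc)]).length + pvUV N M (pvVSet v nr nc) = q.length + pvUV N M v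
      simp only [List.length_append, List.length_singleton]
      have hdims : pvDims N M v := h.dims
      have := pvUV_vset hdims hgrid hfresh
      omega
    · intro r hrg hrv
      exact pvVGet_vset_mono h.dims hgrid hrg.1 hrg.2.2.1 hrv
    · intro _
      rw [pvVGet_vset h.dims hgrid hgrid.1 hgrid.2.2.1, if_pos ⟨rfl, rfl⟩]
  · -- already visited / not good: nothing happens
    have hstep : pvStepA land N M pp.1 pp.2 (v, q, cnt, cov) d = (v, q, cnt, cov) := by
      simp only [pvStepA]
      rw [if_neg hG]
    rw [hstep]
    refine ⟨F, Finset.Subset.refl _, h, rfl, fun r _ hrv => hrv, ?_⟩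
    intro hGd
    rw [pvGuardA_iff (b := pvVGet v nr nc)] at hG
    simp only [not_and] at hG
    have h2 := hG hGd
    simpa using h2

theorem pvFoldA {land : List (List Int)} {N M : Int} {V0 : Int × Int → Prop} {s pp : Int × Int}
    (ds : List (Int × Int)) (hds : ∀ d ∈ ds, pvAdj pp (pp.1 + d.1, pp.2 + d.2)) :
    ∀ st (F : Finset (Int × Int)), pvMidA land N M V0 s pp F st →
    ∃ F', F ⊆ F' ∧
      pvMidA land N M V0 s pp F' (ds.foldl (pvStepA land N M pp.1 pp.2) st) ∧
      (ds.foldl (pvStepA land N M pp.1 pp.2) st).2.1.length +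
          pvUV N M (ds.foldl (pvStepA land N M pp.1 pp.2) st).1
        = st.2.1.length + pvUV N M st.1 ∧
      (∀ r : Int × Int, pvInGrid N M r → pvVGet st.1 r.1 r.2 = true →
        pvVGet (ds.foldl (pvStepA land N M pp.1 pp.2) st).1 r.1 r.2 = true) ∧
      (∀ d ∈ ds, pvGd land N M (pp.1 + d.1, pp.2 + d.2) →
        pvVGet (ds.foldl (pvStepA land N M pp.1 pp.2) st).1 (pp.1 + d.1) (pp.2 + d.2) = true) := by
  induction ds with
  | nil =>
      intro st F h
      exact ⟨F, Finset.Subset.refl _, h, rfl, fun r _ hv => hv, by simp⟩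
  | cons d ds ih =>
      intro st F h
      obtain ⟨F1, hF1, hmid1, hbud1, hmono1, hcov1⟩ := pvStepA_spec (hds d (by simp)) h
      obtain ⟨F2, hF2, hmid2, hbud2, hmono2, hcov2⟩ :=
        ih (fun d' hd' => hds d' (by simp [hd'])) _ F1 hmid1
      rw [List.foldl_cons]
      refine ⟨F2, Finset.Subset.trans hF1 hF2, hmid2, by omega, ?_, ?_⟩
      · intro r hr hv
        exact hmono2 r hr (hmono1 r hr hv)
      · intro d' hd' hgd
        rcases List.mem_cons.mp hd' with rfl | hmemd
        · exact hmono2 _ hgd.1 (hcov1 hgd)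
        · exact hcov2 d' hmemd hgd

theorem pvLoopA {land : List (List Int)} {N M : Int} {V0 : Int × Int → Prop} {s : Int × Int} :
    ∀ (fuel : Nat) (v : List (List Bool)) (q : List (Int × Int)) (cnt : Int)
      (cov : PySem.Set Int) (F : Finset (Int × Int)),
      pvInvA land N M V0 s F (v, q, cnt, cov) →
      q.length + pvUV N M v ≤ fuel →
      ∃ F', F ⊆ F' ∧
        pvInvA land N M V0 s F'
          ((pvBfsLoop land N M fuel v q cnt cov).1, ([] : List (Int × Int)),
            (pvBfsLoop land N M fuel v q cnt cov).2.1,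
            (pvBfsLoop land N M fuel v q cnt cov).2.2) := by
  intro fuel
  induction fuel with
  | zero =>
      intro v q cnt cov F h hbud
      have hq : q = [] := by
        cases q with
        | nil => rfl
        | cons a t => simp at hbud
      subst hq
      exact ⟨F, Finset.Subset.refl _, by simpa only [pvBfsLoop] using h⟩
  | succ fuel ih =>
      intro v q cnt cov F h hbud
      cases q with
      | nil => exact ⟨F, Finset.Subset.refl _, by simpa only [pvBfsLoop] using h⟩
      | cons p rest =>
          obtain ⟨pr, pc⟩ := p
          have hpnot : (pr, pc) ∉ rest := (List.nodup_cons.mp h.qnodup).1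
          have hmid : pvMidA land N M V0 s (pr, pc) F (v, rest, cnt, cov) :=
            { dims := h.dims
              mem := h.mem
              newF := h.newF
              start := h.start
              pmem := h.qmem _ (List.mem_cons_self)
              qmem := fun p hp => h.qmem p (List.mem_cons_of_mem _ hp)
              qnodup := (List.nodup_cons.mp h.qnodup).2
              pnotq := hpnot
              frontier := fun p hpF hpne hpq r hr hgr =>
                h.frontier p hpF (by
                  intro hc
                  rcases List.mem_cons.mp hc with he | hm
                  · exact hpne he
                  · exact hpq hm) r hr hgr
              cnt_eq := h.cnt_eq
              cov_mem := h.cov_mem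
              cov_nodup := h.cov_nodup }
          obtain ⟨F', hsub, hmid', hbud', hmono', hcov'⟩ :=
            pvFoldA pvDirs (fun d _ => pvAdj_of_dir ‹d ∈ pvDirs›) (v, rest, cnt, cov) F hmid
          have hinv' : pvInvA land N M V0 s F'
              (pvDirs.foldl (pvStepA land N M pr pc) (v, rest, cnt, cov)) :=
            { dims := hmid'.dims
              mem := hmid'.mem
              newF := hmid'.newF
              start := hmid'.start
              qmem := hmid'.qmem
              qnodup := hmid'.qnodup
              frontier := by
                intro p hpF hpq r hr hgr
                by_cases hpe : p = (pr, pc)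
                · subst hpe
                  obtain ⟨d, hd, hrd⟩ := pvAdj_exists_dir hr
                  subst hrd
                  exact hcov' d hd hgr
                · exact hmid'.frontier p hpF hpe hpq r hr hgr
              cnt_eq := hmid'.cnt_eq
              cov_mem := hmid'.cov_mem
              cov_nodup := hmid'.cov_nodup }
          have hstep : pvBfsLoop land N M (fuel + 1) v ((pr, pc) :: rest) cnt cov =
              pvBfsLoop land N M fuel
                (pvDirs.foldl (pvStepA land N M pr pc) (v, rest, cnt, cov)).1
                (pvDirs.foldl (pvStepA land N M pr pc) (v, rest, cnt, cov)).2.1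
                (pvDirs.foldl (pvStepA land N M pr pc) (v, rest, cnt, cov)).2.2.1
                (pvDirs.foldl (pvStepA land N M pr pc) (v, rest, cnt, cov)).2.2.2 := by
            rw [pvBfsLoop, pvBfsStep_eq]
          rw [hstep]
          have hbud1 :
              (pvDirs.foldl (pvStepA land N M pr pc) (v, rest, cnt, cov)).2.1.length +
                pvUV N M (pvDirs.foldl (pvStepA land N M pr pc) (v, rest, cnt, cov)).1 =
                rest.length + pvUV N M v := hbud'
          have hbud'' :
              (pvDirs.foldl (pvStepA land N M pr pc) (v, rest, cnt, cov)).2.1.length +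
                pvUV N M (pvDirs.foldl (pvStepA land N M pr pc) (v, rest, cnt, cov)).1 ≤ fuel := by
            simp only [List.length_cons] at hbud
            omega
          obtain ⟨F2, hsub2, hfin⟩ :=
            ih (pvDirs.foldl (pvStepA land N M pr pc) (v, rest, cnt, cov)).1
              (pvDirs.foldl (pvStepA land N M pr pc) (v, rest, cnt, cov)).2.1
              (pvDirs.foldl (pvStepA land N M pr pc) (v, rest, cnt, cov)).2.2.1
              (pvDirs.foldl (pvStepA land N M pr pc) (v, rest, cnt, cov)).2.2.2
              F' hinv' hbud''
          exact ⟨F2, Finset.Subset.trans hsub hsub2, hfin⟩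

theorem pvInvA_final_iff {land : List (List Int)} {N M : Int} {V0 : Int × Int → Prop}
    {s : Int × Int} {F : Finset (Int × Int)} {v cnt cov}
    (hcl : ∀ p r, V0 p → pvAdj p r → pvGd land N M r → V0 r)
    (hs0 : ¬ V0 s) (hgs : pvGd land N M s)
    (h : pvInvA land N M V0 s F (v, [], cnt, cov)) :
    ∀ p, p ∈ F ↔ pvReach land N M s p := by
  intro p
  constructor
  · exact fun hp => (h.newF p hp).2.1
  · intro hr
    induction hr with
    | refl => exact h.start
    | @step a b hr' hadj hgd ih =>
        have hvis := h.frontier a ih (by simp) b hadj hgd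
        rcases (h.mem b hgd.1).mp hvis with hv0 | hfb
        · exact absurd (pvReach_closed hcl hgs (pvReach.step hr' hadj hgd) hv0) hs0
        · exact hfb

-- ===== B-side loop invariant =====
noncomputable def pvUVD (N M : Int) (comp : PySem.Dict (Int × Int) Int) : Nat :=
  ((pvGridF N M).filter (fun p => comp.contains p = false)).card

theorem pvUVD_le {N M : Int} (comp : PySem.Dict (Int × Int) Int) :
    pvUVD N M comp ≤ N.toNat * M.toNat := by
  rw [← pvCard_gridF (N := N) (M := M)]
  exact Finset.card_filter_le _ _

theorem pvDict_contains_insert {comp : PySem.Dict (Int × Int) Int} {p q : Int × Int} {cid : Int} :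
    (comp.insert p cid).contains q = true ↔ q = p ∨ comp.contains q = true := by
  rw [PySem.Dict.contains_insert]
  simp

theorem pvUVD_insert {N M : Int} {comp : PySem.Dict (Int × Int) Int} {p : Int × Int} {cid : Int}
    (hg : pvInGrid N M p) (hfresh : comp.contains p = false) :
    pvUVD N M (comp.insert p cid) + 1 = pvUVD N M comp := by
  have hmem : p ∈ (pvGridF N M).filter (fun q => comp.contains q = false) := by
    simp only [Finset.mem_filter, pvMem_gridF]
    exact ⟨hg, hfresh⟩
  have hset : (pvGridF N M).filter (fun q => (comp.insert p cid).contains q = false) =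
      ((pvGridF N M).filter (fun q => comp.contains q = false)).erase p := by
    ext q
    simp only [Finset.mem_filter, Finset.mem_erase, pvMem_gridF]
    constructor
    · rintro ⟨hq, hval⟩
      have hne : q ≠ p := by
        rintro rfl
        have hins : (comp.insert q cid).contains q = true := pvDict_contains_insert.mpr (Or.inl rfl)
        rw [hval] at hins
        exact Bool.false_ne_true hins
      refine ⟨hne, hq, ?_⟩
      cases hcv : comp.contains q
      · rfl
      · exfalso
        have hins : (comp.insert p cid).contains q = true :=
          pvDict_contains_insert.mpr (Or.inr hcv)
        rw [hval] at hins
        exact Bool.false_ne_true hins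
    · rintro ⟨hne, hq, hval⟩
      refine ⟨hq, ?_⟩
      cases hcv : (comp.insert p cid).contains q
      · rfl
      · exfalso
        rcases pvDict_contains_insert.mp hcv with he | hc
        · exact hne he
        · rw [hval] at hc
          exact Bool.false_ne_true hc
  unfold pvUVD
  rw [hset, Finset.card_erase_of_mem hmem]
  have : 0 < ((pvGridF N M).filter (fun q => comp.contains q = false)).card :=
    Finset.card_pos.mpr ⟨_, hmem⟩
  omega

theorem pvGuardB_iff {land : List (List Int)} {N M : Int} {p : Int × Int} {b : Bool} :
    (0 ≤ p.1 ∧ p.1 < N ∧ 0 ≤ p.2 ∧ p.2 < M ∧ pvCell land p.1 p.2 = 1 ∧ b = false) ↔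
      (pvGd land N M p ∧ b = false) := by
  unfold pvGd pvInGrid; tauto

structure pvMidB (land : List (List Int)) (N M : Int) (V0 : Int × Int → Prop) (s : Int × Int)
    (pp : Int × Int) (cid : Int) (d0 : PySem.Dict (Int × Int) Int) (F : Finset (Int × Int))
    (st : PySem.Dict (Int × Int) Int × List (Int × Int)) : Prop where
  mem : ∀ p : Int × Int, pvInGrid N M p → (st.1.contains p = true ↔ V0 p ∨ p ∈ F)
  val : ∀ p ∈ F, st.1.get? p = some cid
  pres : ∀ p : Int × Int, p ∉ F → st.1.get? p = d0.get? p
  newF : ∀ p ∈ F, pvGd land N M p ∧ pvReach land N M s p ∧ ¬ V0 p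
  start : s ∈ F
  pmem : pp ∈ F
  qmem : ∀ p ∈ st.2, p ∈ F
  qnodup : st.2.Nodup
  pnotq : pp ∉ st.2
  frontier : ∀ p ∈ F, p ≠ pp → p ∉ st.2 → ∀ r : Int × Int, pvAdj p r → pvGd land N M r →
      st.1.contains r = true

structure pvInvB (land : List (List Int)) (N M : Int) (V0 : Int × Int → Prop) (s : Int × Int)
    (cid : Int) (d0 : PySem.Dict (Int × Int) Int) (F : Finset (Int × Int))
    (st : PySem.Dict (Int × Int) Int × List (Int × Int)) : Prop where
  mem : ∀ p : Int × Int, pvInGrid N M p → (st.1.contains p = true ↔ V0 p ∨ p ∈ F)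
  val : ∀ p ∈ F, st.1.get? p = some cid
  pres : ∀ p : Int × Int, p ∉ F → st.1.get? p = d0.get? p
  newF : ∀ p ∈ F, pvGd land N M p ∧ pvReach land N M s p ∧ ¬ V0 p
  start : s ∈ F
  qmem : ∀ p ∈ st.2, p ∈ F
  qnodup : st.2.Nodup
  frontier : ∀ p ∈ F, p ∉ st.2 → ∀ r : Int × Int, pvAdj p r → pvGd land N M r →
      st.1.contains r = true

def pvStepB (land : List (List Int)) (N M cid : Int)
    (st : PySem.Dict (Int × Int) Int × List (Int × Int)) (q : Int × Int) :
    PySem.Dict (Int × Int) Int × List (Int × Int) :=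
  if 0 ≤ q.1 ∧ q.1 < N ∧ 0 ≤ q.2 ∧ q.2 < M ∧ pvCell land q.1 q.2 = 1 ∧
      st.1.contains q = false then
    (st.1.insert q cid, st.2 ++ [q])
  else st

theorem pvDfsStep_eq {land : List (List Int)} {N M cid r c : Int} {st} :
    pvDfsStep land N M cid r c st = (pvNbrs r c).foldl (pvStepB land N M cid) st := rfl

theorem pvStepB_spec {land : List (List Int)} {N M : Int} {V0 : Int × Int → Prop}
    {s pp : Int × Int} {cid : Int} {d0 : PySem.Dict (Int × Int) Int} {F : Finset (Int × Int)}
    {st} {x : Int × Int} (hadj : pvAdj pp x)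
    (h : pvMidB land N M V0 s pp cid d0 F st) :
    ∃ F' : Finset (Int × Int), F ⊆ F' ∧
      pvMidB land N M V0 s pp cid d0 F' (pvStepB land N M cid st x) ∧
      (pvStepB land N M cid st x).2.length + pvUVD N M (pvStepB land N M cid st x).1
        = st.2.length + pvUVD N M st.1 ∧
      (pvStepB land N M cid st x).2.length + F.card = st.2.length + F'.card ∧
      (∀ r : Int × Int, st.1.contains r = true → (pvStepB land N M cid st x).1.contains r = true) ∧
      (pvGd land N M x → (pvStepB land N M cid st x).1.contains x = true) := by
  obtain ⟨comp, stk⟩ := st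
  by_cases hG : 0 ≤ x.1 ∧ x.1 < N ∧ 0 ≤ x.2 ∧ x.2 < M ∧ pvCell land x.1 x.2 = 1 ∧
      comp.contains x = false
  · have hGd : pvGd land N M x := (pvGuardB_iff.mp hG).1
    have hfresh : comp.contains x = false := hG.2.2.2.2.2
    have hgrid : pvInGrid N M x := hGd.1
    have hstep : pvStepB land N M cid (comp, stk) x = (comp.insert x cid, stk ++ [x]) := by
      simp only [pvStepB]
      rw [if_pos hG]
    rw [hstep]
    have hnotF : x ∉ F := by
      intro hmemF
      have := (h.mem x hgrid).mpr (Or.inr hmemF)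
      rw [hfresh] at this; exact Bool.false_ne_true this
    have hnotV0 : ¬ V0 x := by
      intro hv0
      have := (h.mem x hgrid).mpr (Or.inl hv0)
      rw [hfresh] at this; exact Bool.false_ne_true this
    refine ⟨insert x F, Finset.subset_insert _ _, ?_, ?_, ?_, ?_, ?_⟩
    · constructor
      · intro p hp
        show (comp.insert x cid).contains p = true ↔ _
        rw [pvDict_contains_insert, h.mem p hp]
        simp only [Finset.mem_insert]
        tauto
      · intro p hp
        rcases Finset.mem_insert.mp hp with he | hf
        · show (comp.insert x cid).get? p = some cid
          rw [PySem.Dict.get?_insert, if_pos he]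
        · show (comp.insert x cid).get? p = some cid
          rw [PySem.Dict.get?_insert, if_neg (by rintro rfl; exact hnotF hf)]
          exact h.val p hf
      · intro p hpn
        show (comp.insert x cid).get? p = d0.get? p
        rw [PySem.Dict.get?_insert, if_neg (by rintro rfl; exact hpn (Finset.mem_insert_self _ _))]
        exact h.pres p (fun hc => hpn (Finset.mem_insert_of_mem hc))
      · intro p hp
        rcases Finset.mem_insert.mp hp with he | hf
        · subst he
          exact ⟨hGd, pvReach.step (h.newF pp h.pmem).2.1 hadj hGd, hnotV0⟩
        · exact h.newF p hf
      · exact Finset.mem_insert_of_mem h.start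
      · exact Finset.mem_insert_of_mem h.pmem
      · intro p hp
        rcases List.mem_append.mp hp with hq | hx
        · exact Finset.mem_insert_of_mem (h.qmem p hq)
        · simp only [List.mem_singleton] at hx
          subst hx
          exact Finset.mem_insert_self _ _
      · have hxq : x ∉ stk := by
          intro hxq
          have hvis := (h.mem _ hgrid).mpr (Or.inr (h.qmem _ hxq))
          rw [hfresh] at hvis; exact Bool.false_ne_true hvis
        refine h.qnodup.append (List.nodup_singleton _) ?_
        intro a ha hb
        simp only [List.mem_singleton] at hb
        subst hb
        exact hxq ha
      · intro hp
        rcases List.mem_append.mp hp with hq | hx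
        · exact h.pnotq hq
        · simp only [List.mem_singleton] at hx
          have hvis := (h.mem pp (h.newF pp h.pmem).1.1).mpr (Or.inr h.pmem)
          rw [hx] at hvis
          rw [hfresh] at hvis
          exact Bool.false_ne_true hvis
      · intro p hpF hpne hpq r hr hgr
        have hpF' : p ∈ F := by
          rcases Finset.mem_insert.mp hpF with he | hf
          · exact absurd (he ▸ (List.mem_append.mpr (Or.inr (List.mem_singleton.mpr rfl)))) hpq
          · exact hf
        have hpq' : p ∉ stk := fun hc => hpq (List.mem_append.mpr (Or.inl hc))
        have := h.frontier p hpF' hpne hpq' r hr hgr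
        show (comp.insert x cid).contains r = true
        exact pvDict_contains_insert.mpr (Or.inr this)
    · show (stk ++ [x]).length + pvUVD N M (comp.insert x cid) = stk.length + pvUVD N M comp
      simp only [List.length_append, List.length_singleton]
      have := pvUVD_insert (cid := cid) hgrid hfresh
      omega
    · show (stk ++ [x]).length + F.card = stk.length + (insert x F).card
      rw [Finset.card_insert_of_notMem hnotF]
      simp only [List.length_append, List.length_singleton]
      omega
    · intro r hr
      exact pvDict_contains_insert.mpr (Or.inr hr)
    · intro _
      exact pvDict_contains_insert.mpr (Or.inl rfl)
  · have hstep : pvStepB land N M cid (comp, stk) x = (comp, stk) := by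
      simp only [pvStepB]
      rw [if_neg hG]
    rw [hstep]
    refine ⟨F, Finset.Subset.refl _, h, rfl, rfl, fun r hr => hr, ?_⟩
    intro hGd
    rw [pvGuardB_iff (b := comp.contains x)] at hG
    simp only [not_and] at hG
    have h2 := hG hGd
    simpa using h2

theorem pvFoldB {land : List (List Int)} {N M : Int} {V0 : Int × Int → Prop} {s pp : Int × Int}
    {cid : Int} {d0 : PySem.Dict (Int × Int) Int}
    (ns : List (Int × Int)) (hns : ∀ x ∈ ns, pvAdj pp x) :
    ∀ st (F : Finset (Int × Int)), pvMidB land N M V0 s pp cid d0 F st →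
    ∃ F', F ⊆ F' ∧
      pvMidB land N M V0 s pp cid d0 F' (ns.foldl (pvStepB land N M cid) st) ∧
      (ns.foldl (pvStepB land N M cid) st).2.length +
          pvUVD N M (ns.foldl (pvStepB land N M cid) st).1 = st.2.length + pvUVD N M st.1 ∧
      (ns.foldl (pvStepB land N M cid) st).2.length + F.card = st.2.length + F'.card ∧
      (∀ r : Int × Int, st.1.contains r = true →
        (ns.foldl (pvStepB land N M cid) st).1.contains r = true) ∧
      (∀ x ∈ ns, pvGd land N M x →
        (ns.foldl (pvStepB land N M cid) st).1.contains x = true) := by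
  induction ns with
  | nil =>
      intro st F h
      exact ⟨F, Finset.Subset.refl _, h, rfl, rfl, fun r hr => hr, by simp⟩
  | cons x ns ih =>
      intro st F h
      obtain ⟨F1, hF1, hmid1, hbud1, hcard1, hmono1, hcov1⟩ := pvStepB_spec (hns x (by simp)) h
      obtain ⟨F2, hF2, hmid2, hbud2, hcard2, hmono2, hcov2⟩ :=
        ih (fun x' hx' => hns x' (by simp [hx'])) _ F1 hmid1
      rw [List.foldl_cons]
      have hsubc : F.card ≤ F1.card := Finset.card_le_card hF1
      refine ⟨F2, Finset.Subset.trans hF1 hF2, hmid2, by omega, by omega, ?_, ?_⟩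
      · intro r hr
        exact hmono2 r (hmono1 r hr)
      · intro x' hx' hgd
        rcases List.mem_cons.mp hx' with rfl | hmemx
        · exact hmono2 _ (hcov1 hgd)
        · exact hcov2 x' hmemx hgd

theorem pvLoopB {land : List (List Int)} {N M : Int} {V0 : Int × Int → Prop} {s : Int × Int}
    {cid : Int} {d0 : PySem.Dict (Int × Int) Int} :
    ∀ (fuel : Nat) (comp : PySem.Dict (Int × Int) Int) (stk : List (Int × Int)) (sz : Int)
      (F : Finset (Int × Int)),
      pvInvB land N M V0 s cid d0 F (comp, stk) →
      sz + (stk.length : Int) = (F.card : Int) →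
      stk.length + pvUVD N M comp ≤ fuel →
      ∃ F', F ⊆ F' ∧
        pvInvB land N M V0 s cid d0 F'
          ((pvDfsLoop land N M cid fuel comp stk sz).1, ([] : List (Int × Int))) ∧
        (pvDfsLoop land N M cid fuel comp stk sz).2 = (F'.card : Int) := by
  intro fuel
  induction fuel with
  | zero =>
      intro comp stk sz F h hsz hbud
      have hq : stk = [] := by
        cases stk with
        | nil => rfl
        | cons a t => simp at hbud
      subst hq
      refine ⟨F, Finset.Subset.refl _, by simpa only [pvDfsLoop] using h, ?_⟩
      simp only [pvDfsLoop]
      simp at hsz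
      omega
  | succ fuel ih =>
      intro comp stk sz F h hsz hbud
      rcases hlast : stk.getLast? with _ | p
      · have hq : stk = [] := List.getLast?_eq_none_iff.mp hlast
        subst hq
        refine ⟨F, Finset.Subset.refl _, ?_, ?_⟩
        · simpa only [pvDfsLoop, List.getLast?_nil] using h
        · simp only [pvDfsLoop, List.getLast?_nil]
          simp at hsz
          omega
      · obtain ⟨init, rfl⟩ := List.getLast?_eq_some_iff.mp hlast
        have hpmem : p ∈ init ++ [p] := List.mem_append.mpr (Or.inr (List.mem_singleton.mpr rfl))
        have hpnot : p ∉ init := by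
          have := h.qnodup
          rw [List.nodup_append] at this
          intro hc
          exact this.2.2 p hc p (List.mem_singleton.mpr rfl) rfl
        have hmid : pvMidB land N M V0 s p cid d0 F (comp, init) :=
          { mem := h.mem
            val := h.val
            pres := h.pres
            newF := h.newF
            start := h.start
            pmem := h.qmem _ hpmem
            qmem := fun q hq => h.qmem q (List.mem_append.mpr (Or.inl hq))
            qnodup := (List.nodup_append.mp h.qnodup).1
            pnotq := hpnot
            frontier := fun q hqF hqne hqq r hr hgr =>
              h.frontier q hqF (by
                intro hc
                rcases List.mem_append.mp hc with hm | hm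
                · exact hqq hm
                · exact hqne (List.mem_singleton.mp hm)) r hr hgr }
        obtain ⟨F', hsub, hmid', hbud', hcard', hmono', hcov'⟩ :=
          pvFoldB (pvNbrs p.1 p.2) (fun x hx => pvAdj_of_nbr hx) (comp, init) F hmid
        have hinv' : pvInvB land N M V0 s cid d0 F'
            ((pvNbrs p.1 p.2).foldl (pvStepB land N M cid) (comp, init)) :=
          { mem := hmid'.mem
            val := hmid'.val
            pres := hmid'.pres
            newF := hmid'.newF
            start := hmid'.start
            qmem := hmid'.qmem
            qnodup := hmid'.qnodup
            frontier := by
              intro q hqF hqq r hr hgr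
              by_cases hqe : q = p
              · subst hqe
                exact hcov' r (pvAdj_exists_nbr hr) hgr
              · exact hmid'.frontier q hqF hqe hqq r hr hgr }
        have hstep : pvDfsLoop land N M cid (fuel + 1) comp (init ++ [p]) sz =
            pvDfsLoop land N M cid fuel
              ((pvNbrs p.1 p.2).foldl (pvStepB land N M cid) (comp, init)).1
              ((pvNbrs p.1 p.2).foldl (pvStepB land N M cid) (comp, init)).2 (sz + 1) := by
          rw [pvDfsLoop, hlast]
          dsimp only
          rw [List.dropLast_concat, pvDfsStep_eq]
        rw [hstep]
        have hlen : (init ++ [p]).length = init.length + 1 := by simp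
        have hbud1 :
            ((pvNbrs p.1 p.2).foldl (pvStepB land N M cid) (comp, init)).2.length +
              pvUVD N M ((pvNbrs p.1 p.2).foldl (pvStepB land N M cid) (comp, init)).1 =
              init.length + pvUVD N M comp := hbud'
        have hbud2 : (init ++ [p]).length + pvUVD N M comp ≤ fuel + 1 := hbud
        have hbud'' :
            ((pvNbrs p.1 p.2).foldl (pvStepB land N M cid) (comp, init)).2.length +
              pvUVD N M ((pvNbrs p.1 p.2).foldl (pvStepB land N M cid) (comp, init)).1 ≤ fuel := by
          simp only [List.length_append, List.length_singleton] at hbud2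
          omega
        have hcard1 :
            ((pvNbrs p.1 p.2).foldl (pvStepB land N M cid) (comp, init)).2.length + F.card =
              init.length + F'.card := hcard'
        have hsz' : (sz + 1) +
            (((pvNbrs p.1 p.2).foldl (pvStepB land N M cid) (comp, init)).2.length : Int)
            = (F'.card : Int) := by
          have h1 : (init ++ [p]).length = init.length + 1 := by simp
          push_cast at hsz hcard1 ⊢
          omega
        obtain ⟨F2, hsub2, hfin, hval⟩ :=
          ih ((pvNbrs p.1 p.2).foldl (pvStepB land N M cid) (comp, init)).1
            ((pvNbrs p.1 p.2).foldl (pvStepB land N M cid) (comp, init)).2 (sz + 1) F' hinv' hsz'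
            hbud''
        exact ⟨F2, Finset.Subset.trans hsub hsub2, hfin, hval⟩

theorem pvInvB_final_iff {land : List (List Int)} {N M : Int} {V0 : Int × Int → Prop}
    {s : Int × Int} {cid : Int} {d0 : PySem.Dict (Int × Int) Int} {F : Finset (Int × Int)} {comp}
    (hcl : ∀ p r, V0 p → pvAdj p r → pvGd land N M r → V0 r)
    (hs0 : ¬ V0 s) (hgs : pvGd land N M s)
    (h : pvInvB land N M V0 s cid d0 F (comp, [])) :
    ∀ p, p ∈ F ↔ pvReach land N M s p := by
  intro p
  constructor
  · exact fun hp => (h.newF p hp).2.1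
  · intro hr
    induction hr with
    | refl => exact h.start
    | @step a b hr' hadj hgd ih =>
        have hvis := h.frontier a ih (by simp) b hadj hgd
        rcases (h.mem b hgd.1).mp hvis with hv0 | hfb
        · exact absurd (pvReach_closed hcl hgs (pvReach.step hr' hadj hgd) hv0) hs0
        · exact hfb

-- ===== outer invariant and aggregation helpers =====
theorem pvBoolEqOfIff {a b : Bool} (h : a = true ↔ b = true) : a = b := by
  cases a <;> cases b <;> simp_all

noncomputable def pvOilSum (K : Int → Finset (Int × Int)) (cid : Int) (c : Int) : Int :=
  ∑ k ∈ Finset.Ico (0 : Int) cid,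
    (if ((K k).filter (fun p => p.2 = c)).Nonempty then ((K k).card : Int) else 0)

theorem pvColHit_iff {K : Finset (Int × Int)} {c : Int} :
    (K.filter (fun p => p.2 = c)).Nonempty ↔ ∃ r : Int, (r, c) ∈ K := by
  constructor
  · rintro ⟨p, hp⟩
    rw [Finset.mem_filter] at hp
    obtain ⟨p1, p2⟩ := p
    have hc2 : p2 = c := hp.2
    subst hc2
    exact ⟨p1, hp.1⟩
  · rintro ⟨r, hr⟩
    exact ⟨(r, c), Finset.mem_filter.mpr ⟨hr, rfl⟩⟩

theorem pvOilSum_nonneg (K : Int → Finset (Int × Int)) (cid c : Int) : 0 ≤ pvOilSum K cid c := by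
  unfold pvOilSum
  apply Finset.sum_nonneg
  intro k _
  split_ifs
  · positivity
  · exact le_refl 0

def pvOutInv (land : List (List Int)) (N M : Int) (bound : Int × Int → Prop)
    (v : List (List Bool)) (oil : List Int) (comp : PySem.Dict (Int × Int) Int)
    (size : PySem.Dict Int Int) (cid : Int) (K : Int → Finset (Int × Int)) : Prop :=
  pvDims N M v ∧ 0 ≤ cid ∧ (oil.length : Int) = M ∧
  (∀ p : Int × Int, pvInGrid N M p →
    (pvVGet v p.1 p.2 = true ↔ ∃ k, 0 ≤ k ∧ k < cid ∧ p ∈ K k)) ∧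
  (∀ p : Int × Int, pvInGrid N M p → (comp.contains p = true ↔ pvVGet v p.1 p.2 = true)) ∧
  (∀ k, 0 ≤ k → k < cid → ∀ p ∈ K k, pvGd land N M p) ∧
  (∀ k, 0 ≤ k → k < cid → ∀ p ∈ K k, ∀ r : Int × Int, pvAdj p r → pvGd land N M r →
    pvVGet v r.1 r.2 = true) ∧
  (∀ k k', 0 ≤ k → k < cid → 0 ≤ k' → k' < cid → k ≠ k' → Disjoint (K k) (K k')) ∧
  (∀ k, 0 ≤ k → k < cid → ∀ p ∈ K k, comp.get? p = some k) ∧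
  (∀ k, 0 ≤ k → k < cid → size.get? k = some ((K k).card : Int)) ∧
  (∀ c : Int, 0 ≤ c → c < M → PySem.List.pyGetD oil c 0 = pvOilSum K cid c) ∧
  (∀ p : Int × Int, pvGd land N M p → bound p → pvVGet v p.1 p.2 = true)

theorem pvOutInv_mono_bound {land : List (List Int)} {N M : Int}
    {bound bound' : Int × Int → Prop} {v oil comp size cid K}
    (himp : ∀ p : Int × Int, pvGd land N M p → bound' p → bound p)
    (h : pvOutInv land N M bound v oil comp size cid K) :
    pvOutInv land N M bound' v oil comp size cid K := by
  obtain ⟨h1, h2, h3, h4, h5, h6, h7, h8, h9, h10, h11, h12⟩ := h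
  exact ⟨h1, h2, h3, h4, h5, h6, h7, h8, h9, h10, h11,
    fun p hg hb => h12 p hg (himp p hg hb)⟩

theorem pvGetSet_int {oil : List Int} {x c v : Int} (hc0 : 0 ≤ c) (hx0 : 0 ≤ x)
    (hxlen : x < (oil.length : Int)) :
    PySem.List.pyGetD (PySem.List.pySetD oil x v) c 0 =
      if c = x then v else PySem.List.pyGetD oil c 0 := by
  obtain ⟨n, rfl⟩ : ∃ n : Nat, x = (n : Int) := ⟨x.toNat, by omega⟩
  obtain ⟨l, rfl⟩ : ∃ l : Nat, c = (l : Int) := ⟨c.toNat, by omega⟩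
  rw [PySem.List.pySetD_natCast, PySem.List.pyGetD_natCast, PySem.List.pyGetD_natCast,
    pvGetD_set]
  by_cases h : l = n
  · subst h
    rw [if_pos ⟨rfl, by exact_mod_cast hxlen⟩, if_pos rfl]
  · rw [if_neg (by simp [h]), if_neg (by exact_mod_cast h)]

theorem pvOilFold {M : Int} (cnt : Int) :
    ∀ (cov : List Int) (oil : List Int), cov.Nodup → (∀ c ∈ cov, 0 ≤ c ∧ c < M) →
      (oil.length : Int) = M →
      (((cov.foldl (fun o c => PySem.List.pySetD o c (PySem.List.pyGetD o c 0 + cnt))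
          oil).length : Int) = M ∧
        ∀ c : Int, 0 ≤ c → c < M →
          PySem.List.pyGetD
              (cov.foldl (fun o c => PySem.List.pySetD o c (PySem.List.pyGetD o c 0 + cnt)) oil)
              c 0
            = PySem.List.pyGetD oil c 0 + (if c ∈ cov then cnt else 0)) := by
  intro cov
  induction cov with
  | nil =>
      intro oil _ _ hlen
      exact ⟨hlen, fun c _ _ => by simp⟩
  | cons x rest ih =>
      intro oil hnd hrange hlen
      have hx := hrange x (by simp)
      have hlen1 : ((PySem.List.pySetD oil x (PySem.List.pyGetD oil x 0 + cnt)).length : Int)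
          = M := by
        rw [PySem.List.length_pySetD]
        exact hlen
      obtain ⟨ihl, ihv⟩ := ih (PySem.List.pySetD oil x (PySem.List.pyGetD oil x 0 + cnt))
        (List.nodup_cons.mp hnd).2 (fun c hc => hrange c (by simp [hc])) hlen1
      rw [List.foldl_cons]
      refine ⟨ihl, ?_⟩
      intro c hc0 hcM
      rw [ihv c hc0 hcM, pvGetSet_int hc0 hx.1 (by omega)]
      by_cases hcx : c = x
      · subst hcx
        have hnotin : c ∉ rest := (List.nodup_cons.mp hnd).1
        simp [hnotin]
      · simp [hcx, List.mem_cons]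

theorem pvRowFalse {c : Int} (row : List Bool) (hall : ∀ x ∈ row, x = false) :
    PySem.List.pyGetD row c false = false := by
  by_cases hin : PySem.Raise.InRange row.length c
  · exact hall _ (PySem.List.pyGetD_mem (xs := row) (i := c) (d := false) hin)
  · exact PySem.List.pyGetD_of_none _ _ _ (by rwa [PySem.List.pyGet?_eq_none_iff])

theorem pvVGet_replicate {n m : Nat} {r c : Int} :
    pvVGet (List.replicate n (List.replicate m false)) r c = false := by
  unfold pvVGet
  have hrow : PySem.List.pyGetD (List.replicate n (List.replicate m false)) r
      ([] : List Bool) = [] ∨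
      PySem.List.pyGetD (List.replicate n (List.replicate m false)) r [] =
        List.replicate m false := by
    by_cases hin : PySem.Raise.InRange
        (List.replicate n (List.replicate m false) : List (List Bool)).length r
    · exact Or.inr (List.eq_of_mem_replicate
        (PySem.List.pyGetD_mem (xs := List.replicate n (List.replicate m false)) (i := r)
          (d := []) hin))
    · exact Or.inl (PySem.List.pyGetD_of_none _ _ _ (by rwa [PySem.List.pyGet?_eq_none_iff]))
  rcases hrow with h | h <;> rw [h]
  · exact pvRowFalse [] (by simp)
  · exact pvRowFalse _ (fun x hx => List.eq_of_mem_replicate hx)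

-- generic set-building fold (B's per-column id set)
theorem pvSetFold_mem {α : Type} (P : α → Prop) [DecidablePred P] (f : α → Int) :
    ∀ (l : List α) (s0 : PySem.Set Int) (x : Int),
      (x ∈ l.foldl (fun s a => if P a then PySem.Set.add s (f a) else s) s0 ↔
        x ∈ s0 ∨ ∃ a ∈ l, P a ∧ f a = x) := by
  intro l
  induction l with
  | nil => intro s0 x; simp
  | cons a rest ih =>
      intro s0 x
      rw [List.foldl_cons]
      by_cases hP : P a
      · rw [if_pos hP, ih]
        rw [PySem.Set.mem_add]
        constructor
        · rintro ((hs | he) | ⟨b, hb, hPb, hfb⟩)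
          · exact Or.inl hs
          · exact Or.inr ⟨a, by simp, hP, he.symm⟩
          · exact Or.inr ⟨b, by simp [hb], hPb, hfb⟩
        · rintro (hs | ⟨b, hb, hPb, hfb⟩)
          · exact Or.inl (Or.inl hs)
          · rcases List.mem_cons.mp hb with rfl | hbr
            · exact Or.inl (Or.inr hfb.symm)
            · exact Or.inr ⟨b, hbr, hPb, hfb⟩
      · rw [if_neg hP, ih]
        constructor
        · rintro (hs | ⟨b, hb, hPb, hfb⟩)
          · exact Or.inl hs
          · exact Or.inr ⟨b, by simp [hb], hPb, hfb⟩
        · rintro (hs | ⟨b, hb, hPb, hfb⟩)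
          · exact Or.inl hs
          · rcases List.mem_cons.mp hb with rfl | hbr
            · exact absurd hPb hP
            · exact Or.inr ⟨b, hbr, hPb, hfb⟩

theorem pvSetAddNodup' {α : Type} [BEq α] [LawfulBEq α] {s : PySem.Set α} (h : s.Nodup)
    (x : α) : (PySem.Set.add s x).Nodup := by
  unfold PySem.Set.add
  split_ifs with hc
  · exact h
  · refine h.append (List.nodup_singleton _) ?_
    intro a ha hb
    simp only [List.mem_singleton] at hb
    subst hb
    rw [← PySem.Set.contains_iff] at ha
    exact hc ha

theorem pvSetFold_nodup {α : Type} (P : α → Prop) [DecidablePred P] (f : α → Int) :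
    ∀ (l : List α) (s0 : PySem.Set Int), s0.Nodup →
      (l.foldl (fun s a => if P a then PySem.Set.add s (f a) else s) s0).Nodup := by
  intro l
  induction l with
  | nil => intro s0 h; exact h
  | cons a rest ih =>
      intro s0 h
      rw [List.foldl_cons]
      by_cases hP : P a
      · rw [if_pos hP]
        exact ih _ (pvSetAddNodup' h (f a))
      · rw [if_neg hP]
        exact ih _ h

theorem pvFoldlCongrMem {α β : Type} :
    ∀ (l : List α) (f g : β → α → β) (init : β),
      (∀ acc x, x ∈ l → f acc x = g acc x) → l.foldl f init = l.foldl g init := by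
  intro l
  induction l with
  | nil => intro f g init _; rfl
  | cons a rest ih =>
      intro f g init h
      rw [List.foldl_cons, List.foldl_cons, h init a (by simp)]
      exact ih f g _ (fun acc x hx => h acc x (by simp [hx]))

-- ===== per-cell joint step =====
theorem pvCellJoint {land : List (List Int)} {N M : Int} {v : List (List Bool)} {oil : List Int}
    {comp : PySem.Dict (Int × Int) Int} {size : PySem.Dict Int Int} {cid : Int}
    {K : Int → Finset (Int × Int)} {i j : Int}
    (hi0 : 0 ≤ i) (hiN : i < N) (hj0 : 0 ≤ j) (hjM : j < M)
    (hInv : pvOutInv land N M (fun p => p.1 < i ∨ (p.1 = i ∧ p.2 < j)) v oil comp size cid K) :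
    ∃ K' : Int → Finset (Int × Int),
      pvOutInv land N M (fun p => p.1 < i ∨ (p.1 = i ∧ p.2 < j + 1))
        (if pvCell land i j = 1 ∧ pvVGet v i j = false then (pvBfs land N M v oil i j).1 else v)
        (if pvCell land i j = 1 ∧ pvVGet v i j = false then (pvBfs land N M v oil i j).2 else oil)
        (if pvCell land i j = 1 ∧ comp.contains (i, j) = false then
          (pvDfsLoop land N M cid (N.toNat * M.toNat + 1) (comp.insert (i, j) cid) [(i, j)] 0).1
         else comp)
        (if pvCell land i j = 1 ∧ comp.contains (i, j) = false then
          size.insert cid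
            (pvDfsLoop land N M cid (N.toNat * M.toNat + 1) (comp.insert (i, j) cid) [(i, j)] 0).2
         else size)
        (if pvCell land i j = 1 ∧ comp.contains (i, j) = false then cid + 1 else cid) K' := by
  obtain ⟨hdims, hcid0, hoillen, hunion, hciff, hgood, hclosed, hdisj, hcval, hsval, hoil,
    hcover⟩ := hInv
  have hgridij : pvInGrid N M (i, j) := ⟨hi0, hiN, hj0, hjM⟩
  have heq : comp.contains (i, j) = pvVGet v i j := pvBoolEqOfIff (hciff (i, j) hgridij)
  by_cases hg : pvCell land i j = 1 ∧ pvVGet v i j = false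
  · -- an unvisited good cell: a new component is explored on both sides
    have hgB : pvCell land i j = 1 ∧ comp.contains (i, j) = false := ⟨hg.1, by rw [heq]; exact hg.2⟩
    rw [if_pos hg, if_pos hg, if_pos hgB, if_pos hgB, if_pos hgB]
    have hGds : pvGd land N M (i, j) := ⟨hgridij, hg.1⟩
    have hs0 : ¬ (pvInGrid N M (i, j) ∧ pvVGet v i j = true) := by
      rintro ⟨-, hc⟩
      rw [hg.2] at hc
      exact Bool.false_ne_true hc
    have hcl : ∀ p r, (pvInGrid N M p ∧ pvVGet v p.1 p.2 = true) → pvAdj p r →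
        pvGd land N M r → (pvInGrid N M r ∧ pvVGet v r.1 r.2 = true) := by
      intro p r hv0 hadj hgdr
      obtain ⟨k, hk0, hkc, hpk⟩ := (hunion p hv0.1).mp hv0.2
      exact ⟨hgdr.1, hclosed k hk0 hkc p hpk r hadj hgdr⟩
    -- A side
    have hInvA0 : pvInvA land N M (fun p => pvInGrid N M p ∧ pvVGet v p.1 p.2 = true) (i, j)
        {(i, j)} (pvVSet v i j, [(i, j)], 1, PySem.Set.add PySem.Set.empty j) :=
      { dims := pvDims_vset hdims hgridij
        mem := by
          intro p hp
          show pvVGet (pvVSet v i j) p.1 p.2 = true ↔ _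
          rw [pvVGet_vset hdims hgridij hp.1 hp.2.2.1]
          by_cases hpe : p = (i, j)
          · subst hpe
            rw [if_pos ⟨rfl, rfl⟩]
            simp
          · rw [if_neg (fun hcon => hpe (Prod.ext_iff.mpr ⟨hcon.1, hcon.2⟩))]
            simp only [Finset.mem_singleton, hpe, or_false]
            constructor
            · intro hv
              exact ⟨hp, hv⟩
            · rintro ⟨-, hv⟩
              exact hv
        newF := by
          intro p hp
          rw [Finset.mem_singleton] at hp
          subst hp
          exact ⟨hGds, pvReach.refl, hs0⟩
        start := Finset.mem_singleton_self _
        qmem := by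
          intro p hp
          simpa using hp
        qnodup := List.nodup_singleton _
        frontier := by
          intro p hpF hpq r hadj hgdr
          rw [Finset.mem_singleton] at hpF
          subst hpF
          exact absurd (List.mem_singleton.mpr rfl) hpq
        cnt_eq := by simp
        cov_mem := by
          intro c
          rw [PySem.Set.mem_add]
          constructor
          · rintro (hc | rfl)
            · exact absurd hc List.not_mem_nil
            · exact ⟨i, Finset.mem_singleton_self _⟩
          · rintro ⟨r, hr⟩
            rw [Finset.mem_singleton] at hr
            exact Or.inr (Prod.ext_iff.mp hr).2
        cov_nodup := pvSetAddNodup' List.nodup_nil _ }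
    have hbudA : ([(i, j)] : List (Int × Int)).length + pvUV N M (pvVSet v i j) ≤
        N.toNat * M.toNat + 1 := by
      have h1 := pvUV_vset hdims hgridij hg.2
      have h2 := pvUV_le (N := N) (M := M) v
      simp only [List.length_singleton]
      omega
    obtain ⟨FA, hFAsub, hIA⟩ := pvLoopA (N.toNat * M.toNat + 1) (pvVSet v i j) [(i, j)] 1
      (PySem.Set.add PySem.Set.empty j) {(i, j)} hInvA0 hbudA
    -- B side
    have hcfalse : comp.contains (i, j) = false := hgB.2
    have hInvB0 : pvInvB land N M (fun p => pvInGrid N M p ∧ pvVGet v p.1 p.2 = true) (i, j)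
        cid comp {(i, j)} (comp.insert (i, j) cid, [(i, j)]) :=
      { mem := by
          intro p hp
          show (comp.insert (i, j) cid).contains p = true ↔ _
          rw [pvDict_contains_insert]
          by_cases hpe : p = (i, j)
          · subst hpe
            simp
          · simp only [hpe, false_or, Finset.mem_singleton, or_false]
            rw [hciff p hp]
            constructor
            · intro hv
              exact ⟨hp, hv⟩
            · rintro ⟨-, hv⟩
              exact hv
        val := by
          intro p hp
          rw [Finset.mem_singleton] at hp
          show (comp.insert (i, j) cid).get? p = some cid
          rw [PySem.Dict.get?_insert, if_pos hp]
        pres := by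
          intro p hp
          rw [Finset.mem_singleton] at hp
          show (comp.insert (i, j) cid).get? p = comp.get? p
          rw [PySem.Dict.get?_insert, if_neg hp]
        newF := by
          intro p hp
          rw [Finset.mem_singleton] at hp
          subst hp
          exact ⟨hGds, pvReach.refl, hs0⟩
        start := Finset.mem_singleton_self _
        qmem := by
          intro p hp
          simpa using hp
        qnodup := List.nodup_singleton _
        frontier := by
          intro p hpF hpq r hadj hgdr
          rw [Finset.mem_singleton] at hpF
          subst hpF
          exact absurd (List.mem_singleton.mpr rfl) hpq }
    have hszB0 : (0 : Int) + (([(i, j)] : List (Int × Int)).length : Int) =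
        (({(i, j)} : Finset (Int × Int)).card : Int) := by simp
    have hbudB : ([(i, j)] : List (Int × Int)).length + pvUVD N M (comp.insert (i, j) cid) ≤
        N.toNat * M.toNat + 1 := by
      have h1 := pvUVD_insert (cid := cid) hgridij hcfalse
      have h2 := pvUVD_le (N := N) (M := M) comp
      simp only [List.length_singleton]
      omega
    obtain ⟨FB, hFBsub, hIB, hszB⟩ := pvLoopB (N.toNat * M.toNat + 1)
      (comp.insert (i, j) cid) [(i, j)] 0 {(i, j)} hInvB0 hszB0 hbudB
    have hFAiff := pvInvA_final_iff hcl hs0 hGds hIA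
    have hFBiff := pvInvB_final_iff hcl hs0 hGds hIB
    have hFAB : FA = FB := Finset.ext fun p => (hFAiff p).trans (hFBiff p).symm
    subst hFAB
    -- names for the loop results
    refine ⟨Function.update K cid FA, ?_⟩
    have hcovrange : ∀ c ∈ (pvBfsLoop land N M (N.toNat * M.toNat + 1) (pvVSet v i j) [(i, j)] 1
        (PySem.Set.add PySem.Set.empty j)).2.2, 0 ≤ c ∧ c < M := by
      intro c hc
      obtain ⟨r, hr⟩ := (hIA.cov_mem c).mp hc
      have := (hIA.newF _ hr).1
      exact ⟨this.1.2.2.1, this.1.2.2.2⟩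
    obtain ⟨holen', hoval'⟩ := pvOilFold
      (M := M) (pvBfsLoop land N M (N.toNat * M.toNat + 1) (pvVSet v i j) [(i, j)] 1
        (PySem.Set.add PySem.Set.empty j)).2.1
      (pvBfsLoop land N M (N.toNat * M.toNat + 1) (pvVSet v i j) [(i, j)] 1
        (PySem.Set.add PySem.Set.empty j)).2.2 oil hIA.cov_nodup hcovrange hoillen
    have hnotV0FA : ∀ p ∈ FA, ¬ (pvInGrid N M p ∧ pvVGet v p.1 p.2 = true) :=
      fun p hp => (hIA.newF p hp).2.2
    have hVret : ∀ p : Int × Int, pvInGrid N M p →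
        (pvVGet (pvBfs land N M v oil i j).1 p.1 p.2 = true ↔
          (pvInGrid N M p ∧ pvVGet v p.1 p.2 = true) ∨ p ∈ FA) := fun p hp => hIA.mem p hp
    refine ⟨hIA.dims, by omega, holen', ?_, ?_, ?_, ?_, ?_, ?_, ?_, ?_, ?_⟩
    · -- union representation
      intro p hp
      rw [hVret p hp]
      constructor
      · rintro (hv0 | hFA)
        · obtain ⟨k, hk0, hkc, hpk⟩ := (hunion p hp).mp hv0.2
          exact ⟨k, hk0, by omega, by rw [Function.update_of_ne (by omega)]; exact hpk⟩
        · exact ⟨cid, by omega, by omega, by rw [Function.update_self]; exact hFA⟩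
      · rintro ⟨k, hk0, hkc, hpk⟩
        by_cases hke : k = cid
        · subst hke
          rw [Function.update_self] at hpk
          exact Or.inr hpk
        · rw [Function.update_of_ne hke] at hpk
          exact Or.inl ⟨hp, (hunion p hp).mpr ⟨k, hk0, by omega, hpk⟩⟩
    · -- dict membership mirrors the visited array
      intro p hp
      rw [hVret p hp, hIB.mem p hp]
    · -- goodness
      intro k hk0 hkc p hpk
      by_cases hke : k = cid
      · subst hke
        rw [Function.update_self] at hpk
        exact (hIA.newF p hpk).1
      · rw [Function.update_of_ne hke] at hpk
        exact hgood k hk0 (by omega) p hpk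
    · -- closure
      intro k hk0 hkc p hpk r hadj hgdr
      by_cases hke : k = cid
      · subst hke
        rw [Function.update_self] at hpk
        exact hIA.frontier p hpk (by simp) r hadj hgdr
      · rw [Function.update_of_ne hke] at hpk
        have hv := hclosed k hk0 (by omega) p hpk r hadj hgdr
        exact (hVret r hgdr.1).mpr (Or.inl ⟨hgdr.1, hv⟩)
    · -- disjointness
      intro k k' hk0 hkc hk0' hkc' hne
      by_cases hke : k = cid
      · subst hke
        rw [Function.update_self, Function.update_of_ne (by omega)]
        rw [Finset.disjoint_left]
        intro p hpFA hpK
        exact hnotV0FA p hpFA ⟨(hgood k' hk0' (by omega) p hpK).1,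
          (hunion p (hgood k' hk0' (by omega) p hpK).1).mpr ⟨k', hk0', by omega, hpK⟩⟩
      · by_cases hke' : k' = cid
        · subst hke'
          rw [Function.update_of_ne hke, Function.update_self]
          rw [Finset.disjoint_right]
          intro p hpFA hpK
          exact hnotV0FA p hpFA ⟨(hgood k hk0 (by omega) p hpK).1,
            (hunion p (hgood k hk0 (by omega) p hpK).1).mpr ⟨k, hk0, by omega, hpK⟩⟩
        · rw [Function.update_of_ne hke, Function.update_of_ne hke']
          exact hdisj k k' hk0 (by omega) hk0' (by omega) hne
    · -- component ids in the dict
      intro k hk0 hkc p hpk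
      by_cases hke : k = cid
      · subst hke
        rw [Function.update_self] at hpk
        exact hIB.val p hpk
      · rw [Function.update_of_ne hke] at hpk
        have hpV0 : pvInGrid N M p ∧ pvVGet v p.1 p.2 = true :=
          ⟨(hgood k hk0 (by omega) p hpk).1,
            (hunion p (hgood k hk0 (by omega) p hpk).1).mpr ⟨k, hk0, by omega, hpk⟩⟩
        have hpnF : p ∉ FA := fun hc => hnotV0FA p hc hpV0
        rw [hIB.pres p hpnF]
        exact hcval k hk0 (by omega) p hpk
    · -- sizes
      intro k hk0 hkc
      by_cases hke : k = cid
      · subst hke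
        show (size.insert k _).get? k = _
        rw [PySem.Dict.get?_insert, if_pos rfl, Function.update_self, hszB]
      · show (size.insert cid _).get? k = _
        rw [PySem.Dict.get?_insert, if_neg hke, Function.update_of_ne hke]
        exact hsval k hk0 (by omega)
    · -- the oil array
      intro c hc0 hcM
      have hbfseq : (pvBfs land N M v oil i j).2 =
          ((pvBfsLoop land N M (N.toNat * M.toNat + 1) (pvVSet v i j) [(i, j)] 1
            (PySem.Set.add PySem.Set.empty j)).2.2).foldl
            (fun o c => PySem.List.pySetD o c (PySem.List.pyGetD o c 0 +
              (pvBfsLoop land N M (N.toNat * M.toNat + 1) (pvVSet v i j) [(i, j)] 1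
                (PySem.Set.add PySem.Set.empty j)).2.1)) oil := rfl
      rw [hbfseq, hoval' c hc0 hcM, hoil c hc0 hcM]
      have hsplit : Finset.Ico (0 : Int) (cid + 1) = insert cid (Finset.Ico (0 : Int) cid) := by
        ext x
        simp only [Finset.mem_Ico, Finset.mem_insert]
        omega
      unfold pvOilSum
      rw [hsplit, Finset.sum_insert (by simp), Function.update_self]
      have hcongr : ∑ k ∈ Finset.Ico (0 : Int) cid,
          (if ((Function.update K cid FA k).filter (fun p => p.2 = c)).Nonempty
            then ((Function.update K cid FA k).card : Int) else 0) =
          ∑ k ∈ Finset.Ico (0 : Int) cid,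
          (if ((K k).filter (fun p => p.2 = c)).Nonempty then ((K k).card : Int) else 0) := by
        apply Finset.sum_congr rfl
        intro k hk
        rw [Finset.mem_Ico] at hk
        rw [Function.update_of_ne (by omega)]
      rw [hcongr]
      have hmemiff : c ∈ (pvBfsLoop land N M (N.toNat * M.toNat + 1) (pvVSet v i j) [(i, j)] 1
          (PySem.Set.add PySem.Set.empty j)).2.2 ↔ (FA.filter (fun p => p.2 = c)).Nonempty := by
        rw [hIA.cov_mem c, pvColHit_iff]
      have hcnt : (pvBfsLoop land N M (N.toNat * M.toNat + 1) (pvVSet v i j) [(i, j)] 1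
          (PySem.Set.add PySem.Set.empty j)).2.1 = (FA.card : Int) := hIA.cnt_eq
      by_cases hch : (FA.filter (fun p => p.2 = c)).Nonempty
      · rw [if_pos hch, if_pos (hmemiff.mpr hch), hcnt]
        ring
      · rw [if_neg hch, if_neg (fun hc' => hch (hmemiff.mp hc'))]
        ring
    · -- coverage of the processed prefix
      intro p hgd hb
      rcases hb with hb | ⟨hbi, hbj⟩
      · exact (hVret p hgd.1).mpr (Or.inl ⟨hgd.1, hcover p hgd (Or.inl hb)⟩)
      · by_cases hpj : p.2 < j
        · exact (hVret p hgd.1).mpr (Or.inl ⟨hgd.1, hcover p hgd (Or.inr ⟨hbi, hpj⟩)⟩)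
        · have hpe : p = (i, j) := by
            obtain ⟨p1, p2⟩ := p
            simp only at hbi hbj hpj
            simp only [Prod.mk.injEq]
            omega
          rw [hpe]
          exact (hVret (i, j) hgridij).mpr (Or.inr hIA.start)
  · -- guard false on both sides: nothing happens, only the bound advances
    have hgB : ¬ (pvCell land i j = 1 ∧ comp.contains (i, j) = false) := by
      rw [heq]; exact hg
    rw [if_neg hg, if_neg hg, if_neg hgB, if_neg hgB, if_neg hgB]
    refine ⟨K, hdims, hcid0, hoillen, hunion, hciff, hgood, hclosed, hdisj, hcval, hsval, hoil,
      ?_⟩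
    intro p hgd hb
    rcases hb with hb | ⟨hbi, hbj⟩
    · exact hcover p hgd (Or.inl hb)
    · by_cases hpj : p.2 < j
      · exact hcover p hgd (Or.inr ⟨hbi, hpj⟩)
      · have hpe : p = (i, j) := by
          obtain ⟨p1, p2⟩ := p
          simp only at hbi hbj hpj
          simp only [Prod.mk.injEq]
          omega
        rcases not_and_or.mp hg with hc | hv
        · exact absurd (by rw [hpe] at hgd; exact hgd.2) hc
        · rw [hpe]
          simpa using hv

-- ===== the outer double loop, in lockstep =====
def pvABody (land : List (List Int)) (N M i : Int) (st : List (List Bool) × List Int)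
    (j : Int) : List (List Bool) × List Int :=
  if pvCell land i j = 1 ∧ pvVGet st.1 i j = false then pvBfs land N M st.1 st.2 i j else st

def pvBBody (land : List (List Int)) (N M i : Int)
    (st : PySem.Dict (Int × Int) Int × PySem.Dict Int Int × Int) (j : Int) :
    PySem.Dict (Int × Int) Int × PySem.Dict Int Int × Int :=
  if pvCell land i j = 1 ∧ st.1.contains (i, j) = false then
    let r := pvDfsLoop land N M st.2.2 (N.toNat * M.toNat + 1) (st.1.insert (i, j) st.2.2)
      [(i, j)] 0
    (r.1, st.2.1.insert st.2.2 r.2, st.2.2 + 1)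
  else st

def pvARow (land : List (List Int)) (N M : Int) (st : List (List Bool) × List Int) (i : Int) :
    List (List Bool) × List Int :=
  (PySem.List.pyRange 0 M 1).foldl (pvABody land N M i) st

def pvBRow (land : List (List Int)) (N M : Int)
    (st : PySem.Dict (Int × Int) Int × PySem.Dict Int Int × Int) (i : Int) :
    PySem.Dict (Int × Int) Int × PySem.Dict Int Int × Int :=
  (PySem.List.pyRange 0 M 1).foldl (pvBBody land N M i) st

theorem pvRowJoint {land : List (List Int)} {N M i : Int} (hi0 : 0 ≤ i) (hiN : i < N) :
    ∀ (jn : Nat), (jn : Int) ≤ M →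
      ∀ v oil comp size cid K,
        pvOutInv land N M (fun p => p.1 < i ∨ (p.1 = i ∧ p.2 < 0)) v oil comp size cid K →
        ∃ K', pvOutInv land N M (fun p => p.1 < i ∨ (p.1 = i ∧ p.2 < (jn : Int)))
          (((PySem.List.pyRange 0 (jn : Int) 1).foldl (pvABody land N M i) (v, oil))).1
          (((PySem.List.pyRange 0 (jn : Int) 1).foldl (pvABody land N M i) (v, oil))).2
          (((PySem.List.pyRange 0 (jn : Int) 1).foldl (pvBBody land N M i) (comp, size, cid))).1
          (((PySem.List.pyRange 0 (jn : Int) 1).foldl (pvBBody land N M i) (comp, size, cid))).2.1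
          (((PySem.List.pyRange 0 (jn : Int) 1).foldl (pvBBody land N M i) (comp, size, cid))).2.2
          K' := by
  intro jn
  induction jn with
  | zero =>
      intro hle v oil comp size cid K h
      rw [PySem.List.pyRange_one_eq_nil (by omega)]
      exact ⟨K, h⟩
  | succ jn ih =>
      intro hle v oil comp size cid K h
      have hcast : (((jn + 1 : Nat)) : Int) = (jn : Int) + 1 := by push_cast; ring
      rw [hcast, PySem.List.pyRange_one_succ_right (by positivity)]
      rw [List.foldl_append, List.foldl_append]
      obtain ⟨K1, h1⟩ := ih (by omega) v oil comp size cid K h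
      obtain ⟨K2, h2⟩ := pvCellJoint (K := K1) hi0 hiN (by positivity) (by omega) h1
      refine ⟨K2, ?_⟩
      simp only [List.foldl_cons, List.foldl_nil]
      have hB : ∀ (stB : PySem.Dict (Int × Int) Int × PySem.Dict Int Int × Int),
          pvBBody land N M i stB (jn : Int) =
            (if pvCell land i (jn : Int) = 1 ∧ stB.1.contains (i, (jn : Int)) = false then
              (pvDfsLoop land N M stB.2.2 (N.toNat * M.toNat + 1)
                (stB.1.insert (i, (jn : Int)) stB.2.2) [(i, (jn : Int))] 0).1
             else stB.1,
             if pvCell land i (jn : Int) = 1 ∧ stB.1.contains (i, (jn : Int)) = false then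
              stB.2.1.insert stB.2.2
                (pvDfsLoop land N M stB.2.2 (N.toNat * M.toNat + 1)
                  (stB.1.insert (i, (jn : Int)) stB.2.2) [(i, (jn : Int))] 0).2
             else stB.2.1,
             if pvCell land i (jn : Int) = 1 ∧ stB.1.contains (i, (jn : Int)) = false then
              stB.2.2 + 1
             else stB.2.2) := by
        intro stB
        unfold pvBBody
        split_ifs with hc
        · rfl
        · rfl
      have hA : ∀ (stA : List (List Bool) × List Int),
          pvABody land N M i stA (jn : Int) =
            (if pvCell land i (jn : Int) = 1 ∧ pvVGet stA.1 i (jn : Int) = false then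
              (pvBfs land N M stA.1 stA.2 i (jn : Int)).1 else stA.1,
             if pvCell land i (jn : Int) = 1 ∧ pvVGet stA.1 i (jn : Int) = false then
              (pvBfs land N M stA.1 stA.2 i (jn : Int)).2 else stA.2) := by
        intro stA
        unfold pvABody
        split_ifs with hc
        · rfl
        · rfl
      rw [hA, hB]
      exact h2

theorem pvGridJoint {land : List (List Int)} {N M : Int} (hM0 : 0 ≤ M) :
    ∀ (inn : Nat), (inn : Int) ≤ N →
      ∀ v oil comp size cid K,
        pvOutInv land N M (fun p => p.1 < 0) v oil comp size cid K →
        ∃ K', pvOutInv land N M (fun p => p.1 < (inn : Int))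
          (((PySem.List.pyRange 0 (inn : Int) 1).foldl (pvARow land N M) (v, oil))).1
          (((PySem.List.pyRange 0 (inn : Int) 1).foldl (pvARow land N M) (v, oil))).2
          (((PySem.List.pyRange 0 (inn : Int) 1).foldl (pvBRow land N M) (comp, size, cid))).1
          (((PySem.List.pyRange 0 (inn : Int) 1).foldl (pvBRow land N M) (comp, size, cid))).2.1
          (((PySem.List.pyRange 0 (inn : Int) 1).foldl (pvBRow land N M) (comp, size, cid))).2.2
          K' := by
  intro inn
  induction inn with
  | zero =>
      intro hle v oil comp size cid K h
      rw [PySem.List.pyRange_one_eq_nil (by omega)]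
      exact ⟨K, pvOutInv_mono_bound (by intro p _ hb; simpa using hb) h⟩
  | succ inn ih =>
      intro hle v oil comp size cid K h
      have hcast : (((inn + 1 : Nat)) : Int) = (inn : Int) + 1 := by push_cast; ring
      rw [hcast, PySem.List.pyRange_one_succ_right (by positivity)]
      rw [List.foldl_append, List.foldl_append]
      obtain ⟨K1, h1⟩ := ih (by omega) v oil comp size cid K h
      simp only [List.foldl_cons, List.foldl_nil]
      have h1' := pvOutInv_mono_bound
        (bound := fun p => p.1 < (inn : Int))
        (bound' := fun p => p.1 < (inn : Int) ∨ (p.1 = (inn : Int) ∧ p.2 < 0)) (by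
          intro p hgd hb
          rcases hb with hb | ⟨_, hb2⟩
          · exact hb
          · have := hgd.1.2.2.1
            omega) h1
      obtain ⟨K2, h2⟩ := pvRowJoint (i := (inn : Int)) (by positivity) (by omega) M.toNat
        (by omega) _ _ _ _ _ K1 h1'
      refine ⟨K2, ?_⟩
      have hMt : ((M.toNat : Nat) : Int) = M := by omega
      rw [hMt] at h2
      show pvOutInv land N M _ (pvARow land N M _ (inn : Int)).1 (pvARow land N M _ (inn : Int)).2
        (pvBRow land N M _ (inn : Int)).1 (pvBRow land N M _ (inn : Int)).2.1
        (pvBRow land N M _ (inn : Int)).2.2 K2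
      unfold pvARow pvBRow
      refine pvOutInv_mono_bound (by
        intro p hgd hb
        have hp2 : p.2 < M := hgd.1.2.2.2
        by_cases hpi : p.1 < (inn : Int)
        · exact Or.inl hpi
        · right
          constructor
          · omega
          · exact hp2) h2

-- ===== initial state =====
theorem pvGetD_zero_replicate {m : Nat} {c : Int} :
    PySem.List.pyGetD (List.replicate m (0 : Int)) c 0 = 0 := by
  by_cases hin : PySem.Raise.InRange (List.replicate m (0 : Int)).length c
  · exact List.eq_of_mem_replicate
      (PySem.List.pyGetD_mem (xs := List.replicate m (0 : Int)) (i := c) (d := 0) hin)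
  · exact PySem.List.pyGetD_of_none _ _ _ (by rwa [PySem.List.pyGet?_eq_none_iff])

theorem pvInitInv {land : List (List Int)} {N M : Int} (hN : N = (land.length : Int))
    (hM0 : 0 ≤ M) :
    pvOutInv land N M (fun p => p.1 < 0)
      (List.replicate N.toNat (List.replicate M.toNat false))
      (List.replicate M.toNat (0 : Int)) PySem.Dict.empty PySem.Dict.empty 0
      (fun _ => (∅ : Finset (Int × Int))) := by
  have hN0 : 0 ≤ N := by omega
  have hd1 : ((List.replicate N.toNat (List.replicate M.toNat false)).length : Int) = N := by
    simp
    omega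
  have hd3 : ((List.replicate M.toNat (0 : Int)).length : Int) = M := by
    simp
    omega
  have hd2 : ∀ row ∈ List.replicate N.toNat (List.replicate M.toNat false),
      ((row.length : Nat) : Int) = M := by
    intro row hrow
    rw [List.eq_of_mem_replicate hrow]
    simp
    omega
  refine ⟨⟨hd1, hd2⟩, le_refl 0, hd3, ?_, ?_, ?_, ?_, ?_, ?_, ?_, ?_, ?_⟩
  · intro p _
    show pvVGet _ p.1 p.2 = true ↔ _
    rw [pvVGet_replicate]
    constructor
    · intro h
      exact absurd h (by simp)
    · rintro ⟨k, h1, h2, _⟩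
      omega
  · intro p _
    show _ ↔ pvVGet _ p.1 p.2 = true
    rw [pvVGet_replicate, PySem.Dict.contains_empty]
  · intro k h1 h2
    omega
  · intro k h1 h2
    omega
  · intro k k' h1 h2
    omega
  · intro k h1 h2
    omega
  · intro k h1 h2
    omega
  · intro c _ _
    rw [pvGetD_zero_replicate]
    unfold pvOilSum
    rw [Finset.Ico_self, Finset.sum_empty]
  · intro p hgd hb
    have h1 : 0 ≤ p.1 := hgd.1.1
    have h2 : p.1 < 0 := hb
    omega

-- ===== final aggregation =====
theorem pvFinal {land : List (List Int)} {N M : Int} {v : List (List Bool)} {oil : List Int}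
    {comp : PySem.Dict (Int × Int) Int} {size : PySem.Dict Int Int} {cid : Int}
    {K : Int → Finset (Int × Int)} (hM1 : 1 ≤ M)
    (hInv : pvOutInv land N M (fun _ => True) v oil comp size cid K) :
    (PySem.List.max? oil (fun x => x)).getD 0 =
      (PySem.List.pyRange 0 M 1).foldl (fun best c =>
        max best (((PySem.List.pyRange 0 N 1).foldl (fun ids r =>
            if pvCell land r c = 1 then PySem.Set.add ids (comp.getD (r, c) 0) else ids)
          PySem.Set.empty).foldl (fun s k => s + size.getD k 0) 0)) 0 := by
  obtain ⟨hdims, hcid0, hoillen, hunion, hciff, hgood, hclosed, hdisj, hcval, hsval, hoil,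
    hcover⟩ := hInv
  have hcol : ∀ c : Int, 0 ≤ c → c < M →
      (((PySem.List.pyRange 0 N 1).foldl (fun ids r =>
          if pvCell land r c = 1 then PySem.Set.add ids (comp.getD (r, c) 0) else ids)
        PySem.Set.empty).foldl (fun s k => s + size.getD k 0) 0) =
        PySem.List.pyGetD oil c 0 := by
    intro c hc0 hcM
    have hids : ∀ x : Int,
        x ∈ ((PySem.List.pyRange 0 N 1).foldl (fun ids r =>
          if pvCell land r c = 1 then PySem.Set.add ids (comp.getD (r, c) 0) else ids)
          PySem.Set.empty) ↔
          (0 ≤ x ∧ x < cid ∧ ((K x).filter (fun p => p.2 = c)).Nonempty) := by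
      intro x
      rw [pvSetFold_mem (fun r => pvCell land r c = 1) (fun r => comp.getD (r, c) 0)]
      constructor
      · rintro (hx | ⟨r, hrmem, hcell, hfx⟩)
        · exact absurd hx List.not_mem_nil
        · obtain ⟨hr0, hrN⟩ := PySem.List.mem_pyRange_one.mp hrmem
          have hgd : pvGd land N M (r, c) := ⟨⟨hr0, hrN, hc0, hcM⟩, hcell⟩
          have hvis := hcover (r, c) hgd trivial
          obtain ⟨k, hk0, hkc, hpk⟩ := (hunion (r, c) hgd.1).mp hvis
          have hval := hcval k hk0 hkc (r, c) hpk
          have hgetD : comp.getD (r, c) 0 = k := by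
            rw [PySem.Dict.getD_eq_get?_getD, hval]
            rfl
          rw [hgetD] at hfx
          subst hfx
          exact ⟨hk0, hkc, pvColHit_iff.mpr ⟨r, hpk⟩⟩
      · rintro ⟨hx0, hxc, hne⟩
        obtain ⟨r, hr⟩ := pvColHit_iff.mp hne
        have hgd := hgood x hx0 hxc (r, c) hr
        right
        refine ⟨r, PySem.List.mem_pyRange_one.mpr ⟨hgd.1.1, hgd.1.2.1⟩, hgd.2, ?_⟩
        rw [PySem.Dict.getD_eq_get?_getD, hcval x hx0 hxc (r, c) hr]
        rfl
    have hnodup : ((PySem.List.pyRange 0 N 1).foldl (fun ids r =>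
        if pvCell land r c = 1 then PySem.Set.add ids (comp.getD (r, c) 0) else ids)
        PySem.Set.empty).Nodup :=
      pvSetFold_nodup _ _ _ _ List.nodup_nil
    rw [PySem.List.foldl_add (g := fun k => size.getD k 0)]
    rw [zero_add]
    rw [← List.sum_toFinset _ hnodup]
    have hset : ((PySem.List.pyRange 0 N 1).foldl (fun ids r =>
        if pvCell land r c = 1 then PySem.Set.add ids (comp.getD (r, c) 0) else ids)
        PySem.Set.empty).toFinset =
        (Finset.Ico (0 : Int) cid).filter
          (fun k => ((K k).filter (fun p => p.2 = c)).Nonempty) := by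
      ext x
      rw [List.mem_toFinset, hids x, Finset.mem_filter, Finset.mem_Ico]
      tauto
    rw [hset]
    have hcongr : ∀ k ∈ (Finset.Ico (0 : Int) cid).filter
        (fun k => ((K k).filter (fun p => p.2 = c)).Nonempty),
        size.getD k 0 = ((K k).card : Int) := by
      intro k hk
      rw [Finset.mem_filter, Finset.mem_Ico] at hk
      rw [PySem.Dict.getD_eq_get?_getD, hsval k hk.1.1 hk.1.2]
      rfl
    rw [Finset.sum_congr rfl hcongr, Finset.sum_filter]
    rw [hoil c hc0 hcM]
    rfl
  rw [pvFoldlCongrMem (PySem.List.pyRange 0 M 1)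
    (fun best c =>
      max best (((PySem.List.pyRange 0 N 1).foldl (fun ids r =>
          if pvCell land r c = 1 then PySem.Set.add ids (comp.getD (r, c) 0) else ids)
        PySem.Set.empty).foldl (fun s k => s + size.getD k 0) 0))
    (fun best c => max best (PySem.List.pyGetD oil c 0)) 0 (by
      intro acc x hx
      obtain ⟨hx0, hxM⟩ := PySem.List.mem_pyRange_one.mp hx
      dsimp only
      rw [hcol x hx0 hxM])]
  have holen' : M = (oil.length : Int) := hoillen.symm
  rw [holen']
  rw [PySem.List.foldl_pyRange_zero_pyGetD' oil 0 (fun acc x => max acc x) 0]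
  cases oil with
  | nil =>
      exfalso
      simp at hoillen
      omega
  | cons o rest =>
      rw [PySem.List.max?_id_cons]
      have ho : 0 ≤ o := by
        have := hoil 0 (le_refl 0) (by omega)
        rw [PySem.List.pyGetD_zero_cons] at this
        rw [this]
        exact pvOilSum_nonneg K cid 0
      rw [List.foldl_cons]
      have hmax : max (0 : Int) o = o := max_eq_right ho
      simp only [Option.getD_some]
      have hfun : (fun (acc x : Int) => max acc x) = (max : Int → Int → Int) := rfl
      rw [hmax]

-- ===== connecting the ports to the lockstep folds =====
theorem pvSolutionA_eq (land : List (List Int)) :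
    solution land = (PySem.List.max?
      (((PySem.List.pyRange 0 ((land.length : Nat) : Int) 1).foldl
        (pvARow land ((land.length : Nat) : Int) (((PySem.List.pyGetD land 0 []).length : Nat) : Int))
        (List.replicate ((land.length : Nat) : Int).toNat
          (List.replicate (((PySem.List.pyGetD land 0 []).length : Nat) : Int).toNat false),
         List.replicate (((PySem.List.pyGetD land 0 []).length : Nat) : Int).toNat (0 : Int))).2)
      (fun x => x)).getD 0 := rfl

theorem pvSolutionB_eq (land : List (List Int)) :
    solution_alt land =
      (PySem.List.pyRange 0 (((PySem.List.pyGetD land 0 []).length : Nat) : Int) 1).foldl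
        (fun best c =>
          max best
            (((PySem.List.pyRange 0 ((land.length : Nat) : Int) 1).foldl (fun ids r =>
                if pvCell land r c = 1 then
                  PySem.Set.add ids
                    (((PySem.List.pyRange 0 ((land.length : Nat) : Int) 1).foldl
                      (pvBRow land ((land.length : Nat) : Int)
                        (((PySem.List.pyGetD land 0 []).length : Nat) : Int))
                      (PySem.Dict.empty, PySem.Dict.empty, 0)).1.getD (r, c) 0)
                else ids)
              PySem.Set.empty).foldl (fun s k => s +
                (((PySem.List.pyRange 0 ((land.length : Nat) : Int) 1).foldl
                  (pvBRow land ((land.length : Nat) : Int)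
                    (((PySem.List.pyGetD land 0 []).length : Nat) : Int))
                  (PySem.Dict.empty, PySem.Dict.empty, 0)).2.1.getD k 0)) 0)) 0 := rfl

-- ===== the verdict =====
theorem pvSolutionSpec (land : List (List Int)) (hpre : Pre_solution land) :
    solution land = solution_alt land := by
  obtain ⟨hne, hhead, -⟩ := hpre
  have hM1 : 1 ≤ (((PySem.List.pyGetD land 0 []).length : Nat) : Int) := by
    cases land with
    | nil => exact absurd rfl hne
    | cons row rest =>
        rw [PySem.List.pyGetD_zero_cons]
        have : row ≠ [] := hhead
        have : 0 < row.length := List.length_pos_iff.mpr this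
        omega
  set N : Int := ((land.length : Nat) : Int) with hNdef
  set M : Int := (((PySem.List.pyGetD land 0 []).length : Nat) : Int) with hMdef
  have hN : N = (land.length : Int) := rfl
  have hM0 : 0 ≤ M := by positivity
  have hinit := pvInitInv (land := land) (M := M) hN hM0
  obtain ⟨K', hK'⟩ := pvGridJoint (land := land) hM0 land.length (by omega)
    (List.replicate N.toNat (List.replicate M.toNat false)) (List.replicate M.toNat (0 : Int))
    PySem.Dict.empty PySem.Dict.empty 0 (fun _ => ∅) hinit
  have hInvTot := pvOutInv_mono_bound (bound' := fun _ => True) (by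
    intro p hgd _
    exact hgd.1.2.1) hK'
  rw [pvSolutionA_eq, pvSolutionB_eq]
  exact pvFinal hM1 hInvTot

-- ===== VERDICT (by name: the statement is the Claim_ definition above) =====
theorem solution_spec : Claim_equal_solution := by
  intro land _ hpre
  unfold Spec_solution
  exact pvSolutionSpec land hpre
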